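-- pv_equiv track=rewrite | github.com/wan-catherine/Leetcode | problems/N675_Cut_Off_Trees_For_Golf_Event.py | cutOffTree_TLE
-- ===== SOURCE A (Python) =====
-- from typing import List
--
-- def cutOffTree_TLE(forest: List[List[int]]) -> int:
--     rows, cols = len(forest), len(forest[0])
--     directions = [(0,1),(1,0),(0,-1),(-1,0)]
--     mapping = {}
--     pq = []
--     for i in range(rows):
--         for j in range(cols):
--             if forest[i][j] > 1:
--                 pq.append(forest[i][j])
--                 mapping[forest[i][j]] = (i, j)
--     pq.sort()
--     res = 0
--     pr, pc = 0, 0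
--
--     for v in pq:
--         r, c = mapping[v]
--         stack = [(pr, pc)]
--         visited = [[0] * cols for _ in range(rows)]
--         steps = 0
--         flag = False
--         while stack:
--             new_stack = []
--             for rr, cc in stack:
--                 visited[rr][cc] = 1
--                 if rr == r and cc == c:
--                     # res += steps
--                     flag = True
--                     break
--                 is_break = False
--                 for i, j in directions:
--                     row, col = rr + i, cc + j
--                     if row < 0 or row >= rows or col < 0 or col >= cols or forest[row][col] == 0 or visited[row][col]:
--                         continue
--                     new_stack.append((row, col))
--                     if row == r and col == c:
--                         flag = True
--                         res += steps + 1
--                         is_break = True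
--                         break
--                 if is_break:
--                     break
--             steps += 1
--             stack = new_stack
--         if not flag:
--             return -1
--         pr, pc = r, c
--     return res
-- ===== SOURCE B (Python) =====
-- from typing import List
--
--
-- def cutOffTree_TLE(forest: List[List[int]]) -> int:
--     rows, cols = len(forest), len(forest[0])
--     trees = {}
--     for i in range(rows):
--         for j in range(cols):
--             if forest[i][j] > 1:
--                 trees[forest[i][j]] = (i, j)
--     INF = rows * cols + 1
--
--     def dist(sr, sc, tr, tc):
--         # Bellman-Ford-style synchronous relaxation: rebuild the whole distance
--         # table from the previous one until it stops changing (no queue, no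
--         # frontier, no visited set).
--         d = [[INF] * cols for _ in range(rows)]
--         d[sr][sc] = 0
--         for _ in range(rows * cols):
--             nd = [[cell(d, i, j) for j in range(cols)] for i in range(rows)]
--             if nd == d:
--                 break
--             d = nd
--         return d[tr][tc] if d[tr][tc] < INF else -1
--
--     def cell(d, i, j):
--         if forest[i][j] == 0:
--             return d[i][j]
--         best = d[i][j]
--         for dr, dc in ((0, 1), (1, 0), (0, -1), (-1, 0)):
--             r2, c2 = i + dr, j + dc
--             if 0 <= r2 < rows and 0 <= c2 < cols and d[r2][c2] + 1 < best:
--                 best = d[r2][c2] + 1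
--         return best
--
--     res = 0
--     pr = pc = 0
--     for v in sorted(trees):
--         r, c = trees[v]
--         w = dist(pr, pc, r, c)
--         if w == -1:
--             return -1
--         res += w
--         pr, pc = r, c
--     return res
-- ===== Notes on version B (the rewrite author's own statement) =====
-- stated objective: alternative
-- what changed: The per-tree search is replaced by a Bellman-Ford-style synchronous relaxation: a whole distance table is rebuilt from the previous one (each open cell takes the min of its own value and 1 + its four neighbours) until it stops changing, instead of A's frontier expansion with duplicate enqueues and late visited-marking; no queue, frontier or visited structure exists in B.
import Mathlib
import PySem

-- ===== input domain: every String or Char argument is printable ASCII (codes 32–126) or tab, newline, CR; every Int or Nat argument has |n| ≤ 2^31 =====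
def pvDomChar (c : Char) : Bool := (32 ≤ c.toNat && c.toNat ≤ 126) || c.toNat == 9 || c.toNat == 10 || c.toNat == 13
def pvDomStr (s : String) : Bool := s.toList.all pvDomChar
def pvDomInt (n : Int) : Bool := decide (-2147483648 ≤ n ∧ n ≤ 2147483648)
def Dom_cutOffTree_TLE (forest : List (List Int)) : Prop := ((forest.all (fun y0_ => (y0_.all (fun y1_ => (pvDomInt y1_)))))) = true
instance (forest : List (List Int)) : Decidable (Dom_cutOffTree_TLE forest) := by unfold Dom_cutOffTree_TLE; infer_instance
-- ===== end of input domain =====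

-- B replaces A's duplicate-enqueue frontier search by a Bellman-Ford-style synchronous
-- relaxation of a whole distance table to a fixpoint (no queue, no frontier, no visited set);
-- objective: alternative exact algorithm.

-- ===== PORT A =====

-- forest[i][j] (in range under Pre_)
def pvGetF (forest : List (List Int)) (i j : Int) : Int :=
  PySem.List.pyGetD (PySem.List.pyGetD forest i []) j 0

-- m[i][j] for a matrix of ints (A's visited, B's distance table)
def mgetV (m : List (List Int)) (i j : Int) : Int :=
  PySem.List.pyGetD (PySem.List.pyGetD m i []) j 0

-- visited[i][j] = 1
def msetV (m : List (List Int)) (i j : Int) : List (List Int) :=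
  PySem.List.pySetD m i (PySem.List.pySetD (PySem.List.pyGetD m i []) j (1 : Int))

def pvDirs : List (Int × Int) := [(0, 1), (1, 0), (0, -1), (-1, 0)]

-- the `for i, j in directions:` loop of A; returns (appends, res increment, flag, is_break)
def aNbrLoop (forest : List (List Int)) (rows cols r c rr cc steps : Int)
    (visited : List (List Int)) : List (Int × Int) → List (Int × Int) × Int × Bool × Bool
  | [] => ([], 0, false, false)
  | d :: rest =>
    let row := rr + d.1
    let col := cc + d.2
    if row < 0 ∨ rows ≤ row ∨ col < 0 ∨ cols ≤ col ∨ pvGetF forest row col = 0 ∨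
        mgetV visited row col ≠ 0 then
      aNbrLoop forest rows cols r c rr cc steps visited rest
    else if row = r ∧ col = c then
      ([(row, col)], steps + 1, true, true)
    else
      let t := aNbrLoop forest rows cols r c rr cc steps visited rest
      ((row, col) :: t.1, t.2.1, t.2.2.1, t.2.2.2)

structure AState where
  newStack : List (Int × Int)
  visited : List (List Int)
  res : Int
  flag : Bool
deriving Repr

-- the `for rr, cc in stack:` loop of A (with both breaks)
def aStackLoop (forest : List (List Int)) (rows cols r c steps : Int) :
    List (Int × Int) → AState → AState
  | [], st => st
  | (rr, cc) :: rest, st =>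
    let visited' := msetV st.visited rr cc
    if rr = r ∧ cc = c then
      { st with visited := visited', flag := true }
    else
      let q := aNbrLoop forest rows cols r c rr cc steps visited' pvDirs
      let st' : AState := { newStack := st.newStack ++ q.1, visited := visited',
                            res := st.res + q.2.1, flag := st.flag || q.2.2.1 }
      if q.2.2.2 then st' else aStackLoop forest rows cols r c steps rest st'

-- the `while stack:` loop of A (fuel-bounded; the fuel used below is provably sufficient)
def aWhile (forest : List (List Int)) (rows cols r c : Int) :
    Nat → List (Int × Int) → List (List Int) → Int → Int → Bool → Int × Bool
  | 0, _, _, res, _, flag => (res, flag)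
  | fuel + 1, stack, visited, res, steps, flag =>
    if stack = [] then (res, flag)
    else
      let st := aStackLoop forest rows cols r c steps stack ⟨[], visited, res, flag⟩
      aWhile forest rows cols r c fuel st.newStack st.visited st.res (steps + 1) st.flag

-- the `for v in pq:` loop of A
def aOuter (forest : List (List Int)) (rows cols : Int) (mapping : PySem.Dict Int (Int × Int)) :
    List Int → Int → Int → Int → Int
  | [], _, _, res => res
  | v :: rest, pr, pc, res =>
    let rc := mapping.getD v (0, 0)
    let st := aWhile forest rows cols rc.1 rc.2 ((rows * cols).toNat + 3) [(pr, pc)]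
      (List.replicate rows.toNat (List.replicate cols.toNat (0 : Int))) res 0 false
    if st.2 then aOuter forest rows cols mapping rest rc.1 rc.2 st.1 else -1

def cutOffTree_TLE (forest : List (List Int)) : Int :=
  let rows : Int := (forest.length : Int)
  let cols : Int := ((PySem.List.pyGetD forest 0 []).length : Int)
  let build : List Int × PySem.Dict Int (Int × Int) :=
    (PySem.List.pyRange 0 rows 1).foldl (fun st i =>
      (PySem.List.pyRange 0 cols 1).foldl (fun st j =>
        if 1 < pvGetF forest i j then
          (st.1 ++ [pvGetF forest i j], st.2.insert (pvGetF forest i j) (i, j))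
        else st) st) ([], PySem.Dict.empty)
  let pq := PySem.List.sorted build.1 (fun x => x) false
  aOuter forest rows cols build.2 pq 0 0 0

-- ===== PORT B =====

-- the `for dr, dc in …:` loop of B's cell(): running best over the four neighbours
def bNbr (rows cols : Int) (d : List (List Int)) (i j best : Int) : List (Int × Int) → Int
  | [] => best
  | dir :: rest =>
    let r2 := i + dir.1
    let c2 := j + dir.2
    if 0 ≤ r2 ∧ r2 < rows ∧ 0 ≤ c2 ∧ c2 < cols ∧ mgetV d r2 c2 + 1 < best then
      bNbr rows cols d i j (mgetV d r2 c2 + 1) rest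
    else bNbr rows cols d i j best rest

-- B's cell(d, i, j)
def bCell (forest : List (List Int)) (rows cols : Int) (d : List (List Int)) (i j : Int) : Int :=
  if pvGetF forest i j = 0 then mgetV d i j
  else bNbr rows cols d i j (mgetV d i j) pvDirs

-- one synchronous sweep: nd = [[cell(d, i, j) for j ...] for i ...]
def bStep (forest : List (List Int)) (rows cols : Int) (d : List (List Int)) :
    List (List Int) :=
  (PySem.List.pyRange 0 rows 1).map (fun i =>
    (PySem.List.pyRange 0 cols 1).map (fun j => bCell forest rows cols d i j))

-- the `for _ in range(rows*cols):` loop with the `if nd == d: break`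
def bLoop (forest : List (List Int)) (rows cols : Int) : Nat → List (List Int) → List (List Int)
  | 0, d => d
  | t + 1, d =>
    let nd := bStep forest rows cols d
    if nd = d then d else bLoop forest rows cols t nd

-- d = [[INF]*cols ...]; d[sr][sc] = 0
def bInit (rows cols inf sr sc : Int) : List (List Int) :=
  let m := List.replicate rows.toNat (List.replicate cols.toNat inf)
  PySem.List.pySetD m sr (PySem.List.pySetD (PySem.List.pyGetD m sr []) sc (0 : Int))

-- B's dist(sr, sc, tr, tc)
def bDist (forest : List (List Int)) (rows cols inf sr sc tr tc : Int) : Int :=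
  let d := bLoop forest rows cols (rows * cols).toNat (bInit rows cols inf sr sc)
  if mgetV d tr tc < inf then mgetV d tr tc else -1

-- the `for v in sorted(trees):` loop of B
def bOuter (forest : List (List Int)) (rows cols inf : Int)
    (trees : PySem.Dict Int (Int × Int)) : List Int → Int → Int → Int → Int
  | [], _, _, res => res
  | v :: rest, pr, pc, res =>
    let rc := trees.getD v (0, 0)
    let w := bDist forest rows cols inf pr pc rc.1 rc.2
    if w = -1 then -1 else bOuter forest rows cols inf trees rest rc.1 rc.2 (res + w)

def cutOffTree_TLE_alt (forest : List (List Int)) : Int :=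
  let rows : Int := (forest.length : Int)
  let cols : Int := ((PySem.List.pyGetD forest 0 []).length : Int)
  let trees : PySem.Dict Int (Int × Int) :=
    (PySem.List.pyRange 0 rows 1).foldl (fun d i =>
      (PySem.List.pyRange 0 cols 1).foldl (fun d j =>
        if 1 < pvGetF forest i j then d.insert (pvGetF forest i j) (i, j) else d) d)
      PySem.Dict.empty
  let inf := rows * cols + 1
  bOuter forest rows cols inf trees (PySem.List.sorted trees.keys (fun x => x) false) 0 0 0

-- ===== PRECONDITION & SPEC =====
-- Pre_ excludes exactly the inputs on which A raises IndexError: the empty forest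
-- (forest[0]) and forests with a row shorter than the first row (forest[i][j]).
def Pre_cutOffTree_TLE (forest : List (List Int)) : Prop :=
  forest ≠ [] ∧ ∀ row ∈ forest, (PySem.List.pyGetD forest 0 []).length ≤ row.length
instance (forest : List (List Int)) : Decidable (Pre_cutOffTree_TLE forest) := by
  unfold Pre_cutOffTree_TLE; infer_instance

def pvWitness_cutOffTree_TLE : List (List Int) := [[1, 2, 3], [0, 0, 4], [7, 6, 5]]

def Spec_cutOffTree_TLE (forest : List (List Int)) (out : Int) : Prop :=
  out = cutOffTree_TLE_alt forest
instance (forest : List (List Int)) (out : Int) : Decidable (Spec_cutOffTree_TLE forest out) := by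
  unfold Spec_cutOffTree_TLE; infer_instance

-- ===== CLAIM (what is proved, stated in full; the proofs are below) =====
def Claim_equal_cutOffTree_TLE : Prop := ∀ (forest : List (List Int)),
  Dom_cutOffTree_TLE forest → Pre_cutOffTree_TLE forest →
  Spec_cutOffTree_TLE forest (cutOffTree_TLE forest)

-- ===== LEMMAS AND PROOFS =====

-- ---------- basic geometry ----------

def pvInB (rows cols : Int) (z : Int × Int) : Prop :=
  0 ≤ z.1 ∧ z.1 < rows ∧ 0 ≤ z.2 ∧ z.2 < cols

def pvValid (forest : List (List Int)) (rows cols : Int) (z : Int × Int) : Bool :=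
  decide (0 ≤ z.1 ∧ z.1 < rows ∧ 0 ≤ z.2 ∧ z.2 < cols ∧ pvGetF forest z.1 z.2 ≠ 0)

def pvCandL (forest : List (List Int)) (rows cols rr cc : Int) : List (Int × Int) :=
  (pvDirs.map (fun d => (rr + d.1, cc + d.2))).filter (pvValid forest rows cols)

def pvPar (z : Int × Int) : Int := (z.1 + z.2) % 2

lemma pvValid_inB (forest : List (List Int)) (rows cols : Int) (z : Int × Int)
    (h : pvValid forest rows cols z = true) : pvInB rows cols z := by
  simp [pvValid] at h; exact ⟨h.1, h.2.1, h.2.2.1, h.2.2.2.1⟩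

lemma pvPar01 (z : Int × Int) : pvPar z = 0 ∨ pvPar z = 1 := by
  unfold pvPar; omega

lemma pvPar_cand (forest : List (List Int)) (rows cols rr cc : Int) (z : Int × Int)
    (h : z ∈ pvCandL forest rows cols rr cc) : pvPar z ≠ pvPar (rr, cc) := by
  simp only [pvCandL, pvDirs, List.mem_filter, List.mem_map, List.mem_cons,
    List.mem_singleton, List.not_mem_nil, or_false] at h
  obtain ⟨⟨d, hd, hz⟩, -⟩ := h
  rcases hd with h | h | h | h <;> subst h <;> subst hz <;> unfold pvPar <;> simp <;> omega

-- ---------- the visited matrix as a finite set ----------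

def MShape (rows cols : Int) (m : List (List Int)) : Prop :=
  m.length = rows.toNat ∧ ∀ row ∈ m, row.length = cols.toNat

def MRepr (rows cols : Int) (m : List (List Int)) (V : Finset (Int × Int)) : Prop :=
  MShape rows cols m ∧ (∀ z : Int × Int, pvInB rows cols z → (z ∈ V ↔ mgetV m z.1 z.2 ≠ 0)) ∧
  ∀ z ∈ V, pvInB rows cols z

lemma mgetV_msetV_cases (m : List (List Int)) (i j i' j' : Int)
    (hi : 0 ≤ i) (hj : 0 ≤ j) (hi' : 0 ≤ i') (hj' : 0 ≤ j') :
    mgetV (msetV m i j) i' j' = mgetV m i' j' ∨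
      (i' = i ∧ j' = j ∧ mgetV (msetV m i j) i' j' = 1) := by
  unfold mgetV msetV
  rw [PySem.List.pySetD_of_nonneg _ _ hi, PySem.List.pySetD_of_nonneg _ _ hj,
    PySem.List.pyGetD_of_nonneg _ _ hi, PySem.List.pyGetD_of_nonneg _ _ hi',
    PySem.List.pyGetD_of_nonneg _ _ hi', PySem.List.pyGetD_of_nonneg _ _ hj',
    PySem.List.pyGetD_of_nonneg _ _ hj']
  simp only [List.getD, List.getElem?_set]
  by_cases hii : i.toNat = i'.toNat
  · rw [if_pos hii]
    by_cases hlen : i.toNat < m.length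
    · rw [if_pos hlen]
      simp only [Option.getD_some, List.getElem?_set]
      by_cases hjj : j.toNat = j'.toNat
      · rw [if_pos hjj]
        by_cases hjlen : j.toNat < (m[i.toNat]?.getD ([] : List Int)).length
        · rw [if_pos hjlen]
          right
          exact ⟨by omega, by omega, by simp [← hii]⟩
        · rw [if_neg hjlen]
          left
          rw [← hii, ← hjj]
          simp [List.getElem?_eq_none (by omega : (m[i.toNat]?.getD ([]:List Int)).length ≤ j.toNat)]
      · rw [if_neg hjj]
        left
        simp [← hii]
    · rw [if_neg hlen]
      left
      have : m.length ≤ i'.toNat := by omega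
      simp [List.getElem?_eq_none this, List.getElem?_eq_none (by omega : m.length ≤ i.toNat)]
  · rw [if_neg hii]
    left
    rfl

lemma mgetV_msetV_self (rows cols : Int) (m : List (List Int)) (i j : Int)
    (hsh : MShape rows cols m) (hin : pvInB rows cols (i, j)) :
    mgetV (msetV m i j) i j = 1 := by
  obtain ⟨hi, hilt, hj, hjlt⟩ := hin
  simp only at hi hilt hj hjlt
  unfold mgetV msetV
  rw [PySem.List.pySetD_of_nonneg _ _ hi, PySem.List.pySetD_of_nonneg _ _ hj,
    PySem.List.pyGetD_of_nonneg _ _ hi, PySem.List.pyGetD_of_nonneg _ _ hi,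
    PySem.List.pyGetD_of_nonneg _ _ hj]
  have hlen : i.toNat < m.length := by have := hsh.1; omega
  have hget : m[i.toNat]? = some m[i.toNat] := List.getElem?_eq_getElem hlen
  have hjlen : j.toNat < (m.getD i.toNat ([] : List Int)).length := by
    simp only [List.getD, hget, Option.getD_some]
    rw [hsh.2 _ (List.getElem_mem _)]
    omega
  simp only [List.getD] at hjlen
  simp only [List.getD, List.getElem?_set, if_true, eq_self_iff_true]
  rw [if_pos hlen]
  simp only [Option.getD_some, List.getElem?_set, if_true, eq_self_iff_true]
  rw [if_pos hjlen]
  rfl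

lemma MShape_msetV (rows cols : Int) (m : List (List Int)) (i j : Int)
    (h : MShape rows cols m) (hi : 0 ≤ i) (hj : 0 ≤ j) :
    MShape rows cols (msetV m i j) := by
  unfold msetV
  rw [PySem.List.pySetD_of_nonneg _ _ hi, PySem.List.pySetD_of_nonneg _ _ hj,
    PySem.List.pyGetD_of_nonneg _ _ hi]
  refine ⟨by simp [h.1], ?_⟩
  by_cases hlen : i.toNat < m.length
  · intro row hrow
    rcases List.mem_or_eq_of_mem_set hrow with hmem | heq
    · exact h.2 _ hmem
    · subst heq
      rw [List.length_set]
      have hget : m.getD i.toNat ([] : List Int) = m[i.toNat] := by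
        simp [List.getD, List.getElem?_eq_getElem hlen]
      rw [hget]
      exact h.2 _ (List.getElem_mem _)
  · rw [List.set_eq_of_length_le (by omega)]
    exact h.2

lemma MRepr_msetV (rows cols : Int) (m : List (List Int)) (V : Finset (Int × Int)) (i j : Int)
    (h : MRepr rows cols m V) (hin : pvInB rows cols (i, j)) :
    MRepr rows cols (msetV m i j) (insert (i, j) V) := by
  obtain ⟨hsh, hmem, hinb⟩ := h
  obtain ⟨hi, hilt, hj, hjlt⟩ := hin
  simp only at hi hilt hj hjlt
  refine ⟨MShape_msetV rows cols m i j hsh hi hj, ?_, ?_⟩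
  · intro z hz
    by_cases hzij : z = (i, j)
    · subst hzij
      have h1 := mgetV_msetV_self rows cols m i j hsh ⟨hi, hilt, hj, hjlt⟩
      simp only at h1
      constructor
      · intro _; rw [h1]; omega
      · intro _; exact Finset.mem_insert_self _ _
    · rcases mgetV_msetV_cases m i j z.1 z.2 hi hj hz.1 hz.2.2.1 with he | ⟨h1, h2, _⟩
      · rw [he, Finset.mem_insert]
        have : ¬ z = (i, j) := hzij
        rw [hmem z hz]
        tauto
      · exact absurd (Prod.ext_iff.2 ⟨h1, h2⟩) hzij
  · intro z hz
    rcases Finset.mem_insert.1 hz with h1 | h1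
    · subst h1; exact ⟨hi, hilt, hj, hjlt⟩
    · exact hinb z h1

lemma MRepr_init (rows cols : Int) :
    MRepr rows cols (List.replicate rows.toNat (List.replicate cols.toNat 0)) ∅ := by
  refine ⟨⟨by simp, ?_⟩, ?_, by simp⟩
  · intro row hr
    rw [List.eq_of_mem_replicate hr]
    simp
  · intro z hz
    simp only [Finset.notMem_empty, false_iff, ne_eq, not_not]
    unfold mgetV
    rw [PySem.List.pyGetD_of_nonneg _ _ hz.1, PySem.List.pyGetD_of_nonneg _ _ hz.2.2.1]
    simp only [List.getD_eq_getElem?_getD, List.getElem?_replicate]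
    by_cases hlen : z.1.toNat < rows.toNat
    · rw [if_pos hlen]
      simp only [Option.getD_some, List.getElem?_replicate]
      by_cases hlen2 : z.2.toNat < cols.toNat
      · rw [if_pos hlen2]; rfl
      · rw [if_neg hlen2]; rfl
    · rw [if_neg hlen]; rfl

lemma mgetV_msetV_mono (m : List (List Int)) (i j i' j' : Int)
    (hi : 0 ≤ i) (hj : 0 ≤ j) (hi' : 0 ≤ i') (hj' : 0 ≤ j')
    (h : mgetV m i' j' ≠ 0) : mgetV (msetV m i j) i' j' ≠ 0 := by
  rcases mgetV_msetV_cases m i j i' j' hi hj hi' hj' with he | ⟨_, _, he⟩ <;> rw [he] <;> omega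

-- ---------- the BFS layers (shared spec of both programs) ----------

def pvNf (forest : List (List Int)) (rows cols : Int) (F : Finset (Int × Int)) :
    Finset (Int × Int) :=
  F.biUnion (fun w => (pvCandL forest rows cols w.1 w.2).toFinset)

def pvUF (forest : List (List Int)) (rows cols : Int) (s : Int × Int) :
    Nat → Finset (Int × Int) × Finset (Int × Int)
  | 0 => (∅, {s})
  | k + 1 =>
    let p := pvUF forest rows cols s k
    (p.1 ∪ p.2, pvNf forest rows cols p.2 \ (p.1 ∪ p.2))

lemma mem_pvNf (forest : List (List Int)) (rows cols : Int) (F : Finset (Int × Int))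
    (z : Int × Int) :
    z ∈ pvNf forest rows cols F ↔ ∃ w ∈ F, z ∈ pvCandL forest rows cols w.1 w.2 := by
  simp [pvNf]

lemma pvUF_par (forest : List (List Int)) (rows cols : Int) (s : Int × Int) :
    ∀ k z, z ∈ (pvUF forest rows cols s k).2 → pvPar z = (pvPar s + (k : Int)) % 2 := by
  intro k
  induction k with
  | zero =>
    intro z hz
    simp only [pvUF, Finset.mem_singleton] at hz
    subst hz
    have := pvPar01 z
    simp
    omega
  | succ k ih =>
    intro z hz
    simp only [pvUF, Finset.mem_sdiff] at hz
    obtain ⟨w, hw, hzw⟩ := (mem_pvNf forest rows cols _ z).1 hz.1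
    have h1 := pvPar_cand forest rows cols w.1 w.2 z hzw
    have h2 := ih w hw
    have h3 := pvPar01 z
    have h4 := pvPar01 s
    have h5 := pvPar01 w
    have h1' : pvPar z ≠ pvPar w := h1
    push_cast
    push_cast at h2
    omega

lemma pvUF_valid (forest : List (List Int)) (rows cols : Int) (s : Int × Int) (k : Nat)
    (z : Int × Int) (h : z ∈ (pvUF forest rows cols s (k + 1)).2) :
    pvValid forest rows cols z = true := by
  simp only [pvUF, Finset.mem_sdiff] at h
  obtain ⟨w, hw, hzw⟩ := (mem_pvNf forest rows cols _ z).1 h.1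
  exact (List.mem_filter.1 hzw).2

lemma pvUF_inB (forest : List (List Int)) (rows cols : Int) (s : Int × Int)
    (hs : pvInB rows cols s) :
    ∀ k, (∀ z ∈ (pvUF forest rows cols s k).1, pvInB rows cols z) ∧
      (∀ z ∈ (pvUF forest rows cols s k).2, pvInB rows cols z) := by
  intro k
  induction k with
  | zero =>
    constructor
    · intro z hz; simp [pvUF] at hz
    · intro z hz
      simp only [pvUF, Finset.mem_singleton] at hz
      subst hz; exact hs
  | succ k ih =>
    constructor
    · intro z hz
      simp only [pvUF, Finset.mem_union] at hz
      rcases hz with h | h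
      · exact ih.1 z h
      · exact ih.2 z h
    · intro z hz
      exact pvValid_inB forest rows cols z (pvUF_valid forest rows cols s k z hz)

lemma pvUF_disj (forest : List (List Int)) (rows cols : Int) (s : Int × Int) (k : Nat) :
    Disjoint (pvUF forest rows cols s k).1 (pvUF forest rows cols s k).2 := by
  cases k with
  | zero => simp [pvUF]
  | succ k => simp only [pvUF]; exact Finset.disjoint_sdiff

lemma pvUF_F_empty_mono (forest : List (List Int)) (rows cols : Int) (s : Int × Int)
    (k j : Nat) (h : (pvUF forest rows cols s k).2 = ∅) (hkj : k ≤ j) :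
    (pvUF forest rows cols s j).2 = ∅ := by
  induction j, hkj using Nat.le_induction with
  | base => exact h
  | succ j hj ih =>
    simp only [pvUF]
    rw [ih]
    simp [pvNf]

lemma pvUF_mem_U (forest : List (List Int)) (rows cols : Int) (s : Int × Int) :
    ∀ k z, z ∈ (pvUF forest rows cols s k).1 → ∃ j ≤ k, z ∈ (pvUF forest rows cols s j).2 := by
  intro k
  induction k with
  | zero => intro z hz; simp [pvUF] at hz
  | succ k ih =>
    intro z hz
    rcases Finset.mem_union.1 hz with h | h
    · obtain ⟨j, hj1, hj2⟩ := ih z h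
      exact ⟨j, by omega, hj2⟩
    · exact ⟨k, by omega, h⟩

lemma pvNf_disj_F (forest : List (List Int)) (rows cols : Int) (s : Int × Int) (k : Nat) :
    Disjoint (pvNf forest rows cols (pvUF forest rows cols s k).2) (pvUF forest rows cols s k).2 := by
  rw [Finset.disjoint_left]
  intro z hz hz2
  obtain ⟨w, hw, hzw⟩ := (mem_pvNf forest rows cols _ z).1 hz
  have h1 := pvPar_cand forest rows cols w.1 w.2 z hzw
  have h2 := pvUF_par forest rows cols s k w hw
  have h3 := pvUF_par forest rows cols s k z hz2
  exact h1 (by rw [h2, h3])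

lemma pvUF_F_succ (forest : List (List Int)) (rows cols : Int) (s : Int × Int) (k : Nat) :
    (pvUF forest rows cols s (k + 1)).2 =
      pvNf forest rows cols (pvUF forest rows cols s k).2 \ (pvUF forest rows cols s k).1 := by
  have hd := pvNf_disj_F forest rows cols s k
  rw [Finset.disjoint_left] at hd
  ext z
  simp only [pvUF, Finset.mem_sdiff, Finset.mem_union]
  constructor
  · rintro ⟨h1, h2⟩; exact ⟨h1, fun hu => h2 (Or.inl hu)⟩
  · rintro ⟨h1, h2⟩; exact ⟨h1, fun hu => hu.elim h2 (hd h1)⟩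

noncomputable def pvGrid (rows cols : Int) : Finset (Int × Int) :=
  Finset.Icc (0 : Int) (rows - 1) ×ˢ Finset.Icc (0 : Int) (cols - 1)

lemma mem_pvGrid (rows cols : Int) (z : Int × Int) :
    z ∈ pvGrid rows cols ↔ pvInB rows cols z := by
  simp [pvGrid, pvInB, Finset.mem_product]; omega

lemma card_pvGrid (rows cols : Int) (hr : 0 ≤ rows) (hc : 0 ≤ cols) :
    (pvGrid rows cols).card = (rows * cols).toNat := by
  unfold pvGrid
  rw [Finset.card_product, Int.card_Icc, Int.card_Icc]
  have h1 : rows - 1 + 1 - 0 = rows := by ring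
  have h2 : cols - 1 + 1 - 0 = cols := by ring
  rw [h1, h2]
  rcases Int.eq_ofNat_of_zero_le hr with ⟨a, rfl⟩
  rcases Int.eq_ofNat_of_zero_le hc with ⟨b, rfl⟩
  rw [← Int.natCast_mul]
  exact (Int.toNat_natCast (a * b)).symm

lemma pvUF_k_le (forest : List (List Int)) (rows cols : Int) (s : Int × Int)
    (hs : pvInB rows cols s) (hr : 0 ≤ rows) (hc : 0 ≤ cols) (k : Nat)
    (h : (pvUF forest rows cols s k).2 ≠ ∅) : k ≤ (rows * cols).toNat := by
  have key : ∀ j, (pvUF forest rows cols s j).2 ≠ ∅ → j ≤ (pvUF forest rows cols s j).1.card := by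
    intro j
    induction j with
    | zero => intro _; exact Nat.zero_le _
    | succ j ih =>
      intro hne
      have hFj : (pvUF forest rows cols s j).2 ≠ ∅ := by
        intro he
        exact hne (pvUF_F_empty_mono forest rows cols s j (j + 1) he (Nat.le_succ j))
      have hstep : (pvUF forest rows cols s (j + 1)).1.card =
          (pvUF forest rows cols s j).1.card + (pvUF forest rows cols s j).2.card := by
        simp only [pvUF]
        exact Finset.card_union_of_disjoint (pvUF_disj forest rows cols s j)
      have hpos : 0 < (pvUF forest rows cols s j).2.card :=
        Finset.card_pos.2 (Finset.nonempty_iff_ne_empty.2 hFj)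
      have := ih hFj
      omega
  have h1 := key k h
  have h2 : (pvUF forest rows cols s k).1 ⊆ pvGrid rows cols := by
    intro z hz
    exact (mem_pvGrid rows cols z).2 ((pvUF_inB forest rows cols s hs k).1 z hz)
  have h3 := Finset.card_le_card h2
  rw [card_pvGrid rows cols hr hc] at h3
  omega
-- ---------- characterisation of A's loops ----------

lemma aNbrLoop_char (forest : List (List Int)) (rows cols r c rr cc steps : Int)
    (m : List (List Int)) (V : Finset (Int × Int)) (hRepr : MRepr rows cols m V) :
    ∀ D : List (Int × Int),
      (((r, c) ∈ (D.map (fun d => (rr + d.1, cc + d.2))).filter (pvValid forest rows cols) ∧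
          (r, c) ∉ V →
        ∃ L, aNbrLoop forest rows cols r c rr cc steps m D = (L ++ [(r, c)], steps + 1, true, true) ∧
          ∀ z ∈ L, z ∈ (D.map (fun d => (rr + d.1, cc + d.2))).filter (pvValid forest rows cols) ∧
            z ∉ V ∧ z ≠ (r, c)) ∧
       (¬ ((r, c) ∈ (D.map (fun d => (rr + d.1, cc + d.2))).filter (pvValid forest rows cols) ∧
            (r, c) ∉ V) →
        (aNbrLoop forest rows cols r c rr cc steps m D).2 = (0, false, false) ∧
        (aNbrLoop forest rows cols r c rr cc steps m D).1.toFinset =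
          ((D.map (fun d => (rr + d.1, cc + d.2))).filter (pvValid forest rows cols)).toFinset \ V ∧
        ∀ z ∈ (aNbrLoop forest rows cols r c rr cc steps m D).1,
          z ∈ (D.map (fun d => (rr + d.1, cc + d.2))).filter (pvValid forest rows cols) ∧ z ∉ V)) := by
  intro D
  induction D with
  | nil =>
    constructor
    · rintro ⟨h, -⟩; simp at h
    · intro _
      refine ⟨rfl, ?_, by simp [aNbrLoop]⟩
      simp [aNbrLoop]
  | cons d rest ih =>
    obtain ⟨ihf, ihn⟩ := ih
    by_cases hskip : rr + d.1 < 0 ∨ rows ≤ rr + d.1 ∨ cc + d.2 < 0 ∨ cols ≤ cc + d.2 ∨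
        pvGetF forest (rr + d.1) (cc + d.2) = 0 ∨ mgetV m (rr + d.1) (cc + d.2) ≠ 0
    · have hstep : aNbrLoop forest rows cols r c rr cc steps m (d :: rest) =
          aNbrLoop forest rows cols r c rr cc steps m rest := by
        simp only [aNbrLoop]
        rw [if_pos hskip]
      by_cases hv : pvValid forest rows cols (rr + d.1, cc + d.2) = true
      · -- the head cell is valid but already visited
        have hVmem : (rr + d.1, cc + d.2) ∈ V := by
          have hmg : mgetV m (rr + d.1) (cc + d.2) ≠ 0 := by
            simp only [pvValid, decide_eq_true_eq] at hv
            rcases hskip with h | h | h | h | h | h <;> first | exact h | omega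
          exact (hRepr.2.1 _ (pvValid_inB forest rows cols _ hv)).2 hmg
        have hcand : (((d :: rest).map (fun d => (rr + d.1, cc + d.2))).filter
            (pvValid forest rows cols)) =
            (rr + d.1, cc + d.2) :: ((rest.map (fun d => (rr + d.1, cc + d.2))).filter
              (pvValid forest rows cols)) := by
          simp only [List.map_cons, List.filter_cons, hv]
          simp
        rw [hstep, hcand]
        constructor
        · rintro ⟨hmem, hnV⟩
          rcases List.mem_cons.1 hmem with heq | hmem2
          · exact absurd (heq ▸ hVmem) hnV
          · obtain ⟨L, hq, hL⟩ := ihf ⟨hmem2, hnV⟩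
            exact ⟨L, hq, fun z hz => ⟨List.mem_cons_of_mem _ (hL z hz).1, (hL z hz).2.1,
              (hL z hz).2.2⟩⟩
        · intro hn
          have hn2 : ¬ ((r, c) ∈ (rest.map (fun d => (rr + d.1, cc + d.2))).filter
              (pvValid forest rows cols) ∧ (r, c) ∉ V) := by
            intro ⟨h1, h2⟩; exact hn ⟨List.mem_cons_of_mem _ h1, h2⟩
          obtain ⟨h1, h2, h3⟩ := ihn hn2
          refine ⟨h1, ?_, fun z hz => ⟨List.mem_cons_of_mem _ (h3 z hz).1, (h3 z hz).2⟩⟩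
          rw [h2]
          ext w
          simp only [List.toFinset_cons, Finset.mem_sdiff, Finset.mem_insert, List.mem_toFinset]
          constructor
          · tauto
          · rintro ⟨hw, hw2⟩
            rcases hw with rfl | hw
            · exact absurd hVmem hw2
            · exact ⟨hw, hw2⟩
      · -- the head cell is not valid at all
        have hcand : (((d :: rest).map (fun d => (rr + d.1, cc + d.2))).filter
            (pvValid forest rows cols)) =
            ((rest.map (fun d => (rr + d.1, cc + d.2))).filter (pvValid forest rows cols)) := by
          simp only [List.map_cons, List.filter_cons]
          rw [if_neg (by simpa using hv)]
        rw [hstep, hcand]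
        exact ⟨ihf, ihn⟩
    · -- the head cell passes all checks
      push_neg at hskip
      obtain ⟨hb1, hb2, hb3, hb4, hb5, hb6⟩ := hskip
      have hv : pvValid forest rows cols (rr + d.1, cc + d.2) = true := by
        simp only [pvValid, decide_eq_true_eq]
        exact ⟨by omega, by omega, by omega, by omega, hb5⟩
      have hnVz : (rr + d.1, cc + d.2) ∉ V := fun hmem =>
        ((hRepr.2.1 _ (pvValid_inB forest rows cols _ hv)).1 hmem) hb6
      have hcand : (((d :: rest).map (fun d => (rr + d.1, cc + d.2))).filter
          (pvValid forest rows cols)) =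
          (rr + d.1, cc + d.2) :: ((rest.map (fun d => (rr + d.1, cc + d.2))).filter
            (pvValid forest rows cols)) := by
        simp only [List.map_cons, List.filter_cons, hv]
        simp
      by_cases htar : rr + d.1 = r ∧ cc + d.2 = c
      · have hstep : aNbrLoop forest rows cols r c rr cc steps m (d :: rest) =
            ([(rr + d.1, cc + d.2)], steps + 1, true, true) := by
          simp only [aNbrLoop]
          rw [if_neg (by push_neg; exact ⟨hb1, hb2, hb3, hb4, hb5, hb6⟩), if_pos htar]
        have hz0 : ((rr + d.1, cc + d.2) : Int × Int) = (r, c) := by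
          rw [htar.1, htar.2]
        rw [hstep, hcand, hz0]
        constructor
        · intro _
          exact ⟨[], rfl, by simp⟩
        · intro hn
          exact absurd ⟨List.mem_cons_self, hz0 ▸ hnVz⟩ hn
      · have hstep : aNbrLoop forest rows cols r c rr cc steps m (d :: rest) =
            ((rr + d.1, cc + d.2) :: (aNbrLoop forest rows cols r c rr cc steps m rest).1,
              (aNbrLoop forest rows cols r c rr cc steps m rest).2) := by
          simp only [aNbrLoop]
          rw [if_neg (by push_neg; exact ⟨hb1, hb2, hb3, hb4, hb5, hb6⟩), if_neg htar]
        have hz0ne : ((rr + d.1, cc + d.2) : Int × Int) ≠ (r, c) := by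
          simp only [ne_eq, Prod.mk.injEq, not_and]
          intro h1 h2
          exact htar ⟨h1, h2⟩
        rw [hstep, hcand]
        constructor
        · rintro ⟨hmem, hnV⟩
          have hmem2 : (r, c) ∈ (rest.map (fun d => (rr + d.1, cc + d.2))).filter
              (pvValid forest rows cols) := by
            rcases List.mem_cons.1 hmem with heq | h
            · exact absurd heq.symm hz0ne
            · exact h
          obtain ⟨L, hq, hL⟩ := ihf ⟨hmem2, hnV⟩
          refine ⟨(rr + d.1, cc + d.2) :: L, ?_, ?_⟩
          · rw [hq]; simp
          · intro z hz
            rcases List.mem_cons.1 hz with rfl | hz2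
            · exact ⟨List.mem_cons_self, hnVz, hz0ne⟩
            · exact ⟨List.mem_cons_of_mem _ (hL z hz2).1, (hL z hz2).2.1, (hL z hz2).2.2⟩
        · intro hn
          have hn2 : ¬ ((r, c) ∈ (rest.map (fun d => (rr + d.1, cc + d.2))).filter
              (pvValid forest rows cols) ∧ (r, c) ∉ V) := by
            intro ⟨h1, h2⟩; exact hn ⟨List.mem_cons_of_mem _ h1, h2⟩
          obtain ⟨h1, h2, h3⟩ := ihn hn2
          refine ⟨h1, ?_, ?_⟩
          · simp only [List.toFinset_cons]
            rw [h2]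
            ext w
            simp only [Finset.mem_sdiff, Finset.mem_insert, List.mem_toFinset]
            constructor
            · rintro (rfl | ⟨hw, hw2⟩)
              · exact ⟨Or.inl rfl, hnVz⟩
              · exact ⟨Or.inr hw, hw2⟩
            · rintro ⟨rfl | hw, hw2⟩
              · exact Or.inl rfl
              · exact Or.inr ⟨hw, hw2⟩
          · intro z hz
            rcases List.mem_cons.1 hz with rfl | hz2
            · exact ⟨List.mem_cons_self, hnVz⟩
            · exact ⟨List.mem_cons_of_mem _ (h3 z hz2).1, (h3 z hz2).2⟩

lemma aNbrLoop_raw (forest : List (List Int)) (rows cols r c rr cc steps : Int)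
    (m : List (List Int)) (ht : mgetV m r c ≠ 0) :
    ∀ D : List (Int × Int),
      (aNbrLoop forest rows cols r c rr cc steps m D).2 = (0, false, false) ∧
      ∀ z ∈ (aNbrLoop forest rows cols r c rr cc steps m D).1,
        pvValid forest rows cols z = true ∧ z ≠ (r, c) := by
  intro D
  induction D with
  | nil => exact ⟨rfl, by simp [aNbrLoop]⟩
  | cons d rest ih =>
    by_cases hskip : rr + d.1 < 0 ∨ rows ≤ rr + d.1 ∨ cc + d.2 < 0 ∨ cols ≤ cc + d.2 ∨
        pvGetF forest (rr + d.1) (cc + d.2) = 0 ∨ mgetV m (rr + d.1) (cc + d.2) ≠ 0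
    · have hstep : aNbrLoop forest rows cols r c rr cc steps m (d :: rest) =
          aNbrLoop forest rows cols r c rr cc steps m rest := by
        simp only [aNbrLoop]
        rw [if_pos hskip]
      rw [hstep]
      exact ih
    · push_neg at hskip
      obtain ⟨hb1, hb2, hb3, hb4, hb5, hb6⟩ := hskip
      have htar : ¬ (rr + d.1 = r ∧ cc + d.2 = c) := by
        rintro ⟨rfl, rfl⟩
        exact ht hb6
      have hstep : aNbrLoop forest rows cols r c rr cc steps m (d :: rest) =
          ((rr + d.1, cc + d.2) :: (aNbrLoop forest rows cols r c rr cc steps m rest).1,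
            (aNbrLoop forest rows cols r c rr cc steps m rest).2) := by
        simp only [aNbrLoop]
        rw [if_neg (by push_neg; exact ⟨hb1, hb2, hb3, hb4, hb5, hb6⟩), if_neg htar]
      rw [hstep]
      refine ⟨ih.1, ?_⟩
      intro z hz
      rcases List.mem_cons.1 hz with rfl | hz2
      · refine ⟨by simp [pvValid]; exact ⟨by omega, by omega, by omega, by omega, hb5⟩, ?_⟩
        simp only [ne_eq, Prod.mk.injEq, not_and]
        intro h1 h2
        exact htar ⟨h1, h2⟩
      · exact ih.2 z hz2

lemma MRepr_congr (rows cols : Int) (m : List (List Int)) (V V' : Finset (Int × Int))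
    (h : MRepr rows cols m V) (he : V = V') : MRepr rows cols m V' := he ▸ h

lemma aStackLoop_cons_break (forest : List (List Int)) (rows cols r c steps rr cc : Int)
    (rest : List (Int × Int)) (st : AState) (ap : List (Int × Int)) (ra : Int) (fl : Bool)
    (hq : aNbrLoop forest rows cols r c rr cc steps (msetV st.visited rr cc) pvDirs
      = (ap, ra, fl, true))
    (hne : ¬ (rr = r ∧ cc = c)) :
    aStackLoop forest rows cols r c steps ((rr, cc) :: rest) st =
      ⟨st.newStack ++ ap, msetV st.visited rr cc, st.res + ra, st.flag || fl⟩ := by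
  simp only [aStackLoop]
  rw [if_neg hne, hq]
  simp

lemma aStackLoop_cons_go (forest : List (List Int)) (rows cols r c steps rr cc : Int)
    (rest : List (Int × Int)) (st : AState) (ap : List (Int × Int)) (ra : Int) (fl : Bool)
    (hq : aNbrLoop forest rows cols r c rr cc steps (msetV st.visited rr cc) pvDirs
      = (ap, ra, fl, false))
    (hne : ¬ (rr = r ∧ cc = c)) :
    aStackLoop forest rows cols r c steps ((rr, cc) :: rest) st =
      aStackLoop forest rows cols r c steps rest
        ⟨st.newStack ++ ap, msetV st.visited rr cc, st.res + ra, st.flag || fl⟩ := by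
  simp only [aStackLoop]
  rw [if_neg hne, hq]
  simp

lemma aStackLoop_cons_self (forest : List (List Int)) (rows cols r c steps : Int)
    (rest : List (Int × Int)) (st : AState) :
    aStackLoop forest rows cols r c steps ((r, c) :: rest) st =
      (⟨st.newStack, msetV st.visited r c, st.res, true⟩ : AState) := by
  simp [aStackLoop]

set_option maxHeartbeats 1600000 in
lemma aStackLoop_char (forest : List (List Int)) (rows cols r c steps p : Int) :
    ∀ (S : List (Int × Int)) (st : AState) (V : Finset (Int × Int)),
      MRepr rows cols st.visited V →
      (∀ z ∈ S, pvInB rows cols z ∧ pvPar z = p) →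
      (r, c) ∉ S →
      st.flag = false →
      (∀ z ∈ st.newStack, pvValid forest rows cols z = true ∧ pvPar z ≠ p ∧ z ≠ (r, c)) →
      (((r, c) ∉ pvNf forest rows cols S.toFinset \ V →
          (aStackLoop forest rows cols r c steps S st).flag = false ∧
          (aStackLoop forest rows cols r c steps S st).res = st.res ∧
          MRepr rows cols (aStackLoop forest rows cols r c steps S st).visited (V ∪ S.toFinset) ∧
          (aStackLoop forest rows cols r c steps S st).newStack.toFinset =
            st.newStack.toFinset ∪ (pvNf forest rows cols S.toFinset \ V) ∧
          (∀ z ∈ (aStackLoop forest rows cols r c steps S st).newStack,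
            pvValid forest rows cols z = true ∧ pvPar z ≠ p ∧ z ≠ (r, c))) ∧
       ((r, c) ∈ pvNf forest rows cols S.toFinset \ V →
          ∃ V' L, V ⊆ V' ∧ V' ⊆ V ∪ S.toFinset ∧
            MRepr rows cols (aStackLoop forest rows cols r c steps S st).visited V' ∧
            (aStackLoop forest rows cols r c steps S st).res = st.res + steps + 1 ∧
            (aStackLoop forest rows cols r c steps S st).flag = true ∧
            (aStackLoop forest rows cols r c steps S st).newStack = st.newStack ++ L ++ [(r, c)] ∧
            (∀ z ∈ L, pvValid forest rows cols z = true ∧ pvPar z ≠ p ∧ z ≠ (r, c)))) := by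
  intro S
  induction S with
  | nil =>
    intro st V hRepr hS hT hflag hacc
    constructor
    · intro _
      refine ⟨hflag, rfl, by simpa using hRepr, ?_, hacc⟩
      simp [aStackLoop, pvNf]
    · intro hf
      simp [pvNf] at hf
  | cons hd rest ih =>
    intro st V hRepr hS hT hflag hacc
    obtain ⟨rr, cc⟩ := hd
    have hhd := hS (rr, cc) List.mem_cons_self
    have hhdne : ((rr, cc) : Int × Int) ≠ (r, c) := fun h => hT (h ▸ List.mem_cons_self)
    have hhdne' : ¬ (rr = r ∧ cc = c) := by
      rintro ⟨rfl, rfl⟩; exact hhdne rfl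
    have hV1 : MRepr rows cols (msetV st.visited rr cc) (insert ((rr, cc) : Int × Int) V) := by
      have := MRepr_msetV rows cols st.visited V rr cc hRepr hhd.1
      simpa using this
    have hchar := aNbrLoop_char forest rows cols r c rr cc steps
      (msetV st.visited rr cc) (insert ((rr, cc) : Int × Int) V) hV1 pvDirs
    have hcandrw : (pvDirs.map (fun d => (rr + d.1, cc + d.2))).filter (pvValid forest rows cols)
        = pvCandL forest rows cols rr cc := rfl
    rw [hcandrw] at hchar
    have hNfS : pvNf forest rows cols ((rr, cc) :: rest : List (Int × Int)).toFinset =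
        (pvCandL forest rows cols rr cc).toFinset ∪ pvNf forest rows cols rest.toFinset := by
      simp only [List.toFinset_cons, pvNf, Finset.biUnion_insert]
    have hhdNotCand : ((rr, cc) : Int × Int) ∉ pvCandL forest rows cols rr cc := fun hmem =>
      pvPar_cand forest rows cols rr cc _ hmem rfl
    have hhdNotNfRest : ((rr, cc) : Int × Int) ∉ pvNf forest rows cols rest.toFinset := by
      intro hmem
      obtain ⟨w, hw, hzw⟩ := (mem_pvNf forest rows cols _ _).1 hmem
      have h1 := pvPar_cand forest rows cols w.1 w.2 _ hzw
      have h2 := (hS w (List.mem_cons_of_mem _ (List.mem_toFinset.1 hw))).2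
      exact h1 (by rw [hhd.2, h2])
    by_cases hF : (r, c) ∈ pvCandL forest rows cols rr cc ∧
        (r, c) ∉ insert ((rr, cc) : Int × Int) V
    · -- the target is discovered while expanding the head cell
      obtain ⟨L', hq, hL'⟩ := hchar.1 hF
      rw [aStackLoop_cons_break forest rows cols r c steps rr cc rest st _ _ _ hq hhdne']
      have hInNf : (r, c) ∈ pvNf forest rows cols ((rr, cc) :: rest : List (Int × Int)).toFinset \ V := by
        rw [Finset.mem_sdiff, hNfS]
        refine ⟨Finset.mem_union_left _ (List.mem_toFinset.2 hF.1), ?_⟩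
        intro hmem
        exact hF.2 (Finset.mem_insert_of_mem hmem)
      constructor
      · intro hn
        exact absurd hInNf hn
      · intro _
        refine ⟨insert ((rr, cc) : Int × Int) V, L', Finset.subset_insert _ _, ?_, hV1,
          by simp; ring, by simp, by simp, ?_⟩
        · intro z hz
          rcases Finset.mem_insert.1 hz with rfl | hz2
          · exact Finset.mem_union_right _ (by simp)
          · exact Finset.mem_union_left _ hz2
        · intro z hz
          have h1 := hL' z hz
          refine ⟨(List.mem_filter.1 h1.1).2, ?_, h1.2.2⟩
          have := pvPar_cand forest rows cols rr cc z h1.1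
          rw [hhd.2] at this
          exact this
    · -- no discovery at the head cell
      rcases hqdef : aNbrLoop forest rows cols r c rr cc steps (msetV st.visited rr cc) pvDirs
        with ⟨ap, ra, fl, ib⟩
      obtain ⟨hq2, hqset, hqmem⟩ := hchar.2 hF
      rw [hqdef] at hq2 hqset hqmem
      simp only [Prod.mk.injEq] at hq2
      obtain ⟨hra, hfl, hib⟩ := hq2
      subst hra hfl hib
      rw [aStackLoop_cons_go forest rows cols r c steps rr cc rest st _ _ _ hqdef hhdne']
      simp only [Bool.or_false]
      have hq1props : ∀ z ∈ ap, pvValid forest rows cols z = true ∧ pvPar z ≠ p ∧ z ≠ (r, c) := by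
        intro z hz
        have h1 := hqmem z hz
        refine ⟨(List.mem_filter.1 h1.1).2, ?_, ?_⟩
        · have := pvPar_cand forest rows cols rr cc z h1.1
          rw [hhd.2] at this
          exact this
        · rintro rfl
          exact hF ⟨h1.1, h1.2⟩
      have ihspec := ih (⟨st.newStack ++ ap, msetV st.visited rr cc,
              st.res + 0, st.flag⟩ : AState)
          (insert ((rr, cc) : Int × Int) V) hV1
          (fun z hz => hS z (List.mem_cons_of_mem _ hz))
          (fun h => hT (List.mem_cons_of_mem _ h))
          hflag
          (by
            intro z hz
            rcases List.mem_append.1 hz with h1 | h1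
            · exact hacc z h1
            · exact hq1props z h1)
      have htne : ((r, c) : Int × Int) ≠ (rr, cc) := fun h => hhdne h.symm
      have hsplit : ((r, c) ∈ pvNf forest rows cols ((rr, cc) :: rest : List (Int × Int)).toFinset \ V) ↔
          ((r, c) ∈ pvNf forest rows cols rest.toFinset \ insert ((rr, cc) : Int × Int) V) := by
        rw [Finset.mem_sdiff, Finset.mem_sdiff, hNfS, Finset.mem_union, Finset.mem_insert]
        constructor
        · rintro ⟨h1 | h1, h2⟩
          · exact absurd ⟨List.mem_toFinset.1 h1, fun hm => (Finset.mem_insert.1 hm).elim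
              (fun he => htne he) h2⟩ hF
          · exact ⟨h1, fun hm => hm.elim (fun he => htne he) h2⟩
        · rintro ⟨h1, h2⟩
          exact ⟨Or.inr h1, fun hm => h2 (Or.inr hm)⟩
      constructor
      · intro hn
        have hn2 := (fun h => hn (hsplit.2 h))
        obtain ⟨c1, c2, c3, c4, c5⟩ := ihspec.1 hn2
        have hVeq : insert ((rr, cc) : Int × Int) V ∪ rest.toFinset =
            V ∪ ((rr, cc) :: rest : List (Int × Int)).toFinset := by
          ext w
          simp only [Finset.mem_union, Finset.mem_insert, List.toFinset_cons, List.mem_toFinset]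
          constructor
          · rintro ((h | h) | h)
            · exact Or.inr (Or.inl h)
            · exact Or.inl h
            · exact Or.inr (Or.inr h)
          · rintro (h | h | h)
            · exact Or.inl (Or.inr h)
            · exact Or.inl (Or.inl h)
            · exact Or.inr h
        refine ⟨c1, c2.trans (by simp), MRepr_congr rows cols _ _ _ c3 hVeq, c4.trans ?_, c5⟩
        · have e1 : ((st.newStack ++ ap : List (Int × Int))).toFinset =
              st.newStack.toFinset ∪ ap.toFinset := by
            simp
          rw [e1, hqset]
          have e2 : pvNf forest rows cols rest.toFinset \ insert ((rr, cc) : Int × Int) V =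
              pvNf forest rows cols rest.toFinset \ V := by
            ext w
            simp only [Finset.mem_sdiff, Finset.mem_insert]
            constructor
            · rintro ⟨h1, h2⟩; exact ⟨h1, fun hm => h2 (Or.inr hm)⟩
            · rintro ⟨h1, h2⟩
              refine ⟨h1, fun hm => ?_⟩
              rcases hm with rfl | hm
              · exact hhdNotNfRest h1
              · exact h2 hm
          have e3 : (pvCandL forest rows cols rr cc).toFinset \ insert ((rr, cc) : Int × Int) V =
              (pvCandL forest rows cols rr cc).toFinset \ V := by
            ext w
            simp only [Finset.mem_sdiff, Finset.mem_insert, List.mem_toFinset]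
            constructor
            · rintro ⟨h1, h2⟩; exact ⟨h1, fun hm => h2 (Or.inr hm)⟩
            · rintro ⟨h1, h2⟩
              refine ⟨h1, fun hm => ?_⟩
              rcases hm with rfl | hm
              · exact hhdNotCand h1
              · exact h2 hm
          rw [e2, e3, hNfS]
          ext w
          simp only [Finset.mem_union, Finset.mem_sdiff]
          constructor
          · rintro ((h | ⟨h, hv⟩) | ⟨h, hv⟩)
            · exact Or.inl h
            · exact Or.inr ⟨Or.inl h, hv⟩
            · exact Or.inr ⟨Or.inr h, hv⟩
          · rintro (h | ⟨h | h, hv⟩)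
            · exact Or.inl (Or.inl h)
            · exact Or.inl (Or.inr ⟨h, hv⟩)
            · exact Or.inr ⟨h, hv⟩
      · intro hf
        obtain ⟨V', L, d1, d2, d3, d4, d5, d6, d7⟩ := ihspec.2 (hsplit.1 hf)
        refine ⟨V', ap ++ L, ?_, ?_, d3, d4.trans (by simp only []; ring), d5,
          d6.trans (by simp), ?_⟩
        · exact (Finset.subset_insert _ _).trans d1
        · refine d2.trans ?_
          intro w hw
          rcases Finset.mem_union.1 hw with h1 | h1
          · rcases Finset.mem_insert.1 h1 with rfl | h1
            · exact Finset.mem_union_right _ (by simp)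
            · exact Finset.mem_union_left _ h1
          · exact Finset.mem_union_right _ (by simp [List.mem_toFinset.1 h1])
        · intro z hz
          rcases List.mem_append.1 hz with h1 | h1
          · exact hq1props z h1
          · exact d7 z h1

lemma aStackLoop_pop (forest : List (List Int)) (rows cols r c steps : Int) :
    ∀ (L : List (Int × Int)) (st : AState) (V : Finset (Int × Int)),
      MRepr rows cols st.visited V →
      pvInB rows cols (r, c) →
      (∀ z ∈ L, pvInB rows cols z ∧ pvPar z = pvPar (r, c) ∧ z ≠ (r, c)) →
      (∀ z ∈ st.newStack, pvInB rows cols z) →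
      (aStackLoop forest rows cols r c steps (L ++ [(r, c)]) st).res = st.res ∧
      (aStackLoop forest rows cols r c steps (L ++ [(r, c)]) st).flag = true ∧
      mgetV (aStackLoop forest rows cols r c steps (L ++ [(r, c)]) st).visited r c ≠ 0 ∧
      ∀ z ∈ (aStackLoop forest rows cols r c steps (L ++ [(r, c)]) st).newStack,
        pvInB rows cols z := by
  intro L
  induction L with
  | nil =>
    intro st V hRepr hrc hL hacc
    rw [List.nil_append, aStackLoop_cons_self]
    refine ⟨rfl, rfl, ?_, hacc⟩
    have := mgetV_msetV_self rows cols st.visited r c hRepr.1 hrc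
    simp only at this ⊢
    rw [this]
    omega
  | cons hd L ih =>
    intro st V hRepr hrc hL hacc
    obtain ⟨zr, zc⟩ := hd
    have hz := hL (zr, zc) List.mem_cons_self
    have hne' : ¬ (zr = r ∧ zc = c) := by
      rintro ⟨rfl, rfl⟩; exact hz.2.2 rfl
    have hV1 : MRepr rows cols (msetV st.visited zr zc) (insert ((zr, zc) : Int × Int) V) := by
      have := MRepr_msetV rows cols st.visited V zr zc hRepr hz.1
      simpa using this
    have hchar := aNbrLoop_char forest rows cols r c zr zc steps
      (msetV st.visited zr zc) (insert ((zr, zc) : Int × Int) V) hV1 pvDirs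
    have hnotc : ¬ ((r, c) ∈ (pvDirs.map (fun d => (zr + d.1, zc + d.2))).filter
        (pvValid forest rows cols) ∧ (r, c) ∉ insert ((zr, zc) : Int × Int) V) := by
      rintro ⟨hmem, -⟩
      have h1 := pvPar_cand forest rows cols zr zc (r, c) hmem
      exact h1 hz.2.1.symm
    obtain ⟨hq2, hqset, hqmem⟩ := hchar.2 hnotc
    rcases hqdef : aNbrLoop forest rows cols r c zr zc steps (msetV st.visited zr zc) pvDirs
      with ⟨ap, ra, fl, ib⟩
    rw [hqdef] at hq2 hqset hqmem
    simp only [Prod.mk.injEq] at hq2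
    obtain ⟨hra, hfl, hib⟩ := hq2
    subst hra hfl hib
    rw [List.cons_append,
      aStackLoop_cons_go forest rows cols r c steps zr zc (L ++ [(r, c)]) st _ _ _ hqdef hne']
    have ihspec := ih (⟨st.newStack ++ ap, msetV st.visited zr zc, st.res + 0, st.flag || false⟩ :
        AState) (insert ((zr, zc) : Int × Int) V) hV1 hrc
      (fun z hzm => hL z (List.mem_cons_of_mem _ hzm))
      (by
        intro z hzm
        rcases List.mem_append.1 hzm with h1 | h1
        · exact hacc z h1
        · exact pvValid_inB forest rows cols z (List.mem_filter.1 (hqmem z h1).1).2)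
    refine ⟨ihspec.1.trans (by simp), ihspec.2.1, ihspec.2.2.1, ihspec.2.2.2⟩

lemma aStackLoop_flood (forest : List (List Int)) (rows cols r c steps : Int)
    (hr0 : 0 ≤ r) (hc0 : 0 ≤ c) :
    ∀ (S : List (Int × Int)) (st : AState),
      (∀ z ∈ S, pvInB rows cols z) →
      (∀ z ∈ st.newStack, pvInB rows cols z) →
      mgetV st.visited r c ≠ 0 →
      st.flag = true →
      (aStackLoop forest rows cols r c steps S st).res = st.res ∧
      (aStackLoop forest rows cols r c steps S st).flag = true ∧
      mgetV (aStackLoop forest rows cols r c steps S st).visited r c ≠ 0 ∧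
      ∀ z ∈ (aStackLoop forest rows cols r c steps S st).newStack, pvInB rows cols z := by
  intro S
  induction S with
  | nil =>
    intro st hS hacc ht hflag
    exact ⟨rfl, hflag, ht, hacc⟩
  | cons hd S ih =>
    intro st hS hacc ht hflag
    obtain ⟨zr, zc⟩ := hd
    have hz := hS (zr, zc) List.mem_cons_self
    have ht' : mgetV (msetV st.visited zr zc) r c ≠ 0 :=
      mgetV_msetV_mono st.visited zr zc r c hz.1 hz.2.2.1 hr0 hc0 ht
    by_cases hself : zr = r ∧ zc = c
    · obtain ⟨rfl, rfl⟩ := hself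
      rw [aStackLoop_cons_self]
      exact ⟨rfl, rfl, ht', hacc⟩
    · obtain ⟨hq2, hqmem⟩ := aNbrLoop_raw forest rows cols r c zr zc steps
        (msetV st.visited zr zc) ht' pvDirs
      rcases hqdef : aNbrLoop forest rows cols r c zr zc steps (msetV st.visited zr zc) pvDirs
        with ⟨ap, ra, fl, ib⟩
      rw [hqdef] at hq2 hqmem
      simp only [Prod.mk.injEq] at hq2
      obtain ⟨hra, hfl, hib⟩ := hq2
      subst hra hfl hib
      rw [aStackLoop_cons_go forest rows cols r c steps zr zc S st _ _ _ hqdef hself]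
      have ihspec := ih (⟨st.newStack ++ ap, msetV st.visited zr zc, st.res + 0,
          st.flag || false⟩ : AState)
        (fun z hzm => hS z (List.mem_cons_of_mem _ hzm))
        (by
          intro z hzm
          rcases List.mem_append.1 hzm with h1 | h1
          · exact hacc z h1
          · exact pvValid_inB forest rows cols z (hqmem z h1).1)
        ht'
        (by simp [hflag])
      refine ⟨ihspec.1.trans (by simp), ihspec.2.1, ihspec.2.2.1, ihspec.2.2.2⟩

lemma aWhile_flood (forest : List (List Int)) (rows cols r c : Int)
    (hr0 : 0 ≤ r) (hc0 : 0 ≤ c) :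
    ∀ (fuel : Nat) (S : List (Int × Int)) (m : List (List Int)) (res steps : Int),
      (∀ z ∈ S, pvInB rows cols z) → mgetV m r c ≠ 0 →
      aWhile forest rows cols r c fuel S m res steps true = (res, true) := by
  intro fuel
  induction fuel with
  | zero => intro S m res steps _ _; rfl
  | succ fuel ih =>
    intro S m res steps hS hm
    by_cases hSe : S = []
    · subst hSe
      simp [aWhile]
    · have hfl := aStackLoop_flood forest rows cols r c steps hr0 hc0 S
        (⟨[], m, res, true⟩ : AState) hS (by simp) hm rfl
      simp only [aWhile, if_neg hSe]
      rw [hfl.1, hfl.2.1]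
      exact ih _ _ _ _ hfl.2.2.2 hfl.2.2.1

lemma aWhile_main (forest : List (List Int)) (rows cols r c : Int) (s : Int × Int)
    (hs : pvInB rows cols s) (hr : 0 ≤ rows) (hc : 0 ≤ cols) :
    ∀ (fuel : Nat) (k : Nat) (S : List (Int × Int)) (m : List (List Int)) (res : Int),
      MRepr rows cols m (pvUF forest rows cols s k).1 →
      S.toFinset = (pvUF forest rows cols s k).2 →
      (∀ z ∈ S, pvInB rows cols z ∧ pvPar z = (pvPar s + (k : Int)) % 2) →
      (∀ j ≤ k, (r, c) ∉ (pvUF forest rows cols s j).2) →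
      (rows * cols).toNat + 2 ≤ fuel + k →
      (∀ h : ∃ j, (r, c) ∈ (pvUF forest rows cols s j).2,
        aWhile forest rows cols r c fuel S m res (k : Int) false =
          (res + (Nat.find h : Int), true)) ∧
      ((¬ ∃ j, (r, c) ∈ (pvUF forest rows cols s j).2) →
        aWhile forest rows cols r c fuel S m res (k : Int) false = (res, false)) := by
  intro fuel
  induction fuel with
  | zero =>
    intro k S m res hRepr hset hmem hnot hfuel
    constructor
    · rintro ⟨j, hj⟩
      exfalso
      have hne : (pvUF forest rows cols s j).2 ≠ ∅ := by
        intro he; rw [he] at hj; exact absurd hj (Finset.notMem_empty _)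
      have hjle := pvUF_k_le forest rows cols s hs hr hc j hne
      exact absurd hj (hnot j (by omega))
    · intro _; rfl
  | succ fuel ih =>
    intro k S m res hRepr hset hmem hnot hfuel
    by_cases hSe : S = []
    · have hFke : (pvUF forest rows cols s k).2 = ∅ := by
        rw [← hset, hSe]; rfl
      have hnone : ¬ ∃ j, (r, c) ∈ (pvUF forest rows cols s j).2 := by
        rintro ⟨j, hj⟩
        by_cases hjk : j ≤ k
        · exact absurd hj (hnot j hjk)
        · have := pvUF_F_empty_mono forest rows cols s k j hFke (by omega)
          rw [this] at hj
          exact absurd hj (Finset.notMem_empty _)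
      refine ⟨fun h => absurd h hnone, fun _ => ?_⟩
      subst hSe
      simp [aWhile]
    · have hFk : (pvUF forest rows cols s k).2 ≠ ∅ := by
        rw [← hset]
        simpa using hSe
      have hkRC := pvUF_k_le forest rows cols s hs hr hc k hFk
      have hT : (r, c) ∉ S := by
        intro hmemS
        exact hnot k le_rfl (hset ▸ List.mem_toFinset.2 hmemS)
      have hchar := aStackLoop_char forest rows cols r c ((k : Nat) : Int)
        ((pvPar s + (k : Int)) % 2) S (⟨[], m, res, false⟩ : AState)
        (pvUF forest rows cols s k).1 hRepr hmem hT rfl (by simp)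
      rw [hset] at hchar
      have hsucc1 : (pvUF forest rows cols s (k + 1)).1 =
          (pvUF forest rows cols s k).1 ∪ (pvUF forest rows cols s k).2 := rfl
      by_cases hdisc : (r, c) ∈ pvNf forest rows cols (pvUF forest rows cols s k).2 \
          (pvUF forest rows cols s k).1
      · -- the target is discovered at this level
        have hFsucc : (r, c) ∈ (pvUF forest rows cols s (k + 1)).2 := by
          rw [pvUF_F_succ forest rows cols s k]
          exact hdisc
        have hfound : ∃ j, (r, c) ∈ (pvUF forest rows cols s j).2 := ⟨k + 1, hFsucc⟩
        obtain ⟨V', L, hV'1, hV'2, hRepr', hres, hflag, hns, hLprops⟩ := hchar.2 hdisc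
        have hrcvalid : pvValid forest rows cols (r, c) = true := by
          obtain ⟨w, hw, hzw⟩ := (mem_pvNf forest rows cols _ _).1 (Finset.mem_sdiff.1 hdisc).1
          exact (List.mem_filter.1 hzw).2
        have hrcinB : pvInB rows cols (r, c) := pvValid_inB forest rows cols _ hrcvalid
        have hrcpar : pvPar (r, c) ≠ (pvPar s + (k : Int)) % 2 := by
          obtain ⟨w, hw, hzw⟩ := (mem_pvNf forest rows cols _ _).1 (Finset.mem_sdiff.1 hdisc).1
          have h1 := pvPar_cand forest rows cols w.1 w.2 _ hzw
          have h2 := pvUF_par forest rows cols s k w hw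
          rw [← h2]
          exact h1
        -- one more level pops the target, then the flood keeps everything unchanged
        have hfuel1 : 1 ≤ fuel := by omega
        obtain ⟨f, rfl⟩ : ∃ f, fuel = f + 1 := ⟨fuel - 1, by omega⟩
        have hstep : aWhile forest rows cols r c (f + 1 + 1) S m res (k : Int) false =
            aWhile forest rows cols r c (f + 1) (L ++ [(r, c)])
              (aStackLoop forest rows cols r c (k : Int) S
                (⟨[], m, res, false⟩ : AState)).visited (res + (k : Int) + 1) ((k : Int) + 1)
              true := by
          simp only [aWhile, if_neg hSe]
          rw [hres, hflag, hns]
          simp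
        have hpop := aStackLoop_pop forest rows cols r c ((k : Int) + 1) L
          (⟨[], (aStackLoop forest rows cols r c (k : Int) S
            (⟨[], m, res, false⟩ : AState)).visited, res + (k : Int) + 1, true⟩ : AState)
          V' hRepr' hrcinB
          (by
            intro z hz
            have h1 := hLprops z hz
            refine ⟨pvValid_inB forest rows cols z h1.1, ?_, h1.2.2⟩
            have h2 := pvPar01 z
            have h3 := pvPar01 (r, c)
            have h4 : (0 : Int) ≤ (pvPar s + (k : Int)) % 2 := by omega
            have h5 : (pvPar s + (k : Int)) % 2 < 2 := by omega
            have := h1.2.1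
            omega)
          (by simp)
        have hLne : L ++ [(r, c)] ≠ [] := by simp
        have hstep2 : aWhile forest rows cols r c (f + 1) (L ++ [(r, c)])
              (aStackLoop forest rows cols r c (k : Int) S
                (⟨[], m, res, false⟩ : AState)).visited (res + (k : Int) + 1) ((k : Int) + 1)
              true = (res + (k : Int) + 1, true) := by
          simp only [aWhile, if_neg hLne]
          rw [hpop.1, hpop.2.1]
          exact aWhile_flood forest rows cols r c hrcinB.1 hrcinB.2.2.1 f _ _ _ _
            hpop.2.2.2 hpop.2.2.1
        constructor
        · intro h
          have : Nat.find h = k + 1 := by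
            rw [Nat.find_eq_iff]
            exact ⟨hFsucc, fun j hj => hnot j (by omega)⟩
          rw [hstep, hstep2, this]
          push_cast
          ring_nf
        · intro hnone
          exact absurd hfound hnone
      · -- no discovery at this level: move to the next layer
        obtain ⟨hflag1, hres1, hRepr1, hset1, hprops1⟩ := hchar.1 hdisc
        have hnot' : ∀ j ≤ k + 1, (r, c) ∉ (pvUF forest rows cols s j).2 := by
          intro j hj
          by_cases hjk : j ≤ k
          · exact hnot j hjk
          · have : j = k + 1 := by omega
            subst this
            rw [pvUF_F_succ forest rows cols s k]
            exact hdisc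
        have hset1' : (aStackLoop forest rows cols r c (k : Int) S
            (⟨[], m, res, false⟩ : AState)).newStack.toFinset =
            (pvUF forest rows cols s (k + 1)).2 := by
          rw [hset1, pvUF_F_succ forest rows cols s k]
          simp
        have hRepr1' : MRepr rows cols (aStackLoop forest rows cols r c (k : Int) S
            (⟨[], m, res, false⟩ : AState)).visited (pvUF forest rows cols s (k + 1)).1 := by
          rw [hsucc1]
          exact hRepr1
        have hmem1 : ∀ z ∈ (aStackLoop forest rows cols r c (k : Int) S
            (⟨[], m, res, false⟩ : AState)).newStack,
            pvInB rows cols z ∧ pvPar z = (pvPar s + ((k + 1 : Nat) : Int)) % 2 := by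
          intro z hz
          have h1 := hprops1 z hz
          refine ⟨pvValid_inB forest rows cols z h1.1, ?_⟩
          have h2 := pvPar01 z
          have h3 := pvPar01 s
          have := h1.2.1
          push_cast
          omega
        have ihspec := ih (k + 1)
          (aStackLoop forest rows cols r c (k : Int) S (⟨[], m, res, false⟩ : AState)).newStack
          (aStackLoop forest rows cols r c (k : Int) S (⟨[], m, res, false⟩ : AState)).visited
          res hRepr1' hset1' hmem1 hnot' (by omega)
        have hcast : (((k + 1 : Nat)) : Int) = (k : Int) + 1 := by push_cast; ring
        rw [hcast] at ihspec
        have hstep : aWhile forest rows cols r c (fuel + 1) S m res (k : Int) false =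
            aWhile forest rows cols r c fuel
              (aStackLoop forest rows cols r c (k : Int) S
                (⟨[], m, res, false⟩ : AState)).newStack
              (aStackLoop forest rows cols r c (k : Int) S
                (⟨[], m, res, false⟩ : AState)).visited res ((k : Int) + 1) false := by
          simp only [aWhile, if_neg hSe]
          rw [hres1, hflag1]
        rw [hstep]
        exact ihspec
-- ---------- extra layer facts used by B's relaxation ----------

lemma pvUF_U_mono (forest : List (List Int)) (rows cols : Int) (s : Int × Int)
    (j k : Nat) (hjk : j ≤ k) :
    (pvUF forest rows cols s j).1 ⊆ (pvUF forest rows cols s k).1 := by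
  induction k, hjk using Nat.le_induction with
  | base => exact subset_rfl
  | succ k hk ih =>
    refine ih.trans ?_
    intro z hz
    simp only [pvUF]
    exact Finset.mem_union_left _ hz

lemma pvUF_F_sub_U (forest : List (List Int)) (rows cols : Int) (s : Int × Int)
    (j k : Nat) (h : j < k) :
    (pvUF forest rows cols s j).2 ⊆ (pvUF forest rows cols s k).1 := by
  intro z hz
  have h1 : z ∈ (pvUF forest rows cols s (j + 1)).1 := by
    simp only [pvUF]
    exact Finset.mem_union_right _ hz
  exact pvUF_U_mono forest rows cols s (j + 1) k (by omega) h1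

lemma pvUF_layer_unique (forest : List (List Int)) (rows cols : Int) (s : Int × Int)
    (j k : Nat) (z : Int × Int)
    (hj : z ∈ (pvUF forest rows cols s j).2) (hk : z ∈ (pvUF forest rows cols s k).2) :
    j = k := by
  by_contra hne
  rcases Nat.lt_or_ge j k with h | h
  · exact Finset.disjoint_left.1 (pvUF_disj forest rows cols s k)
      (pvUF_F_sub_U forest rows cols s j k h hj) hk
  · have hlt : k < j := by omega
    exact Finset.disjoint_left.1 (pvUF_disj forest rows cols s j)
      (pvUF_F_sub_U forest rows cols s k j hlt hk) hj

lemma mem_pvCandL_iff (forest : List (List Int)) (rows cols a b : Int) (z : Int × Int) :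
    z ∈ pvCandL forest rows cols a b ↔
      (∃ dir ∈ pvDirs, z = (a + dir.1, b + dir.2)) ∧ pvValid forest rows cols z = true := by
  simp only [pvCandL, List.mem_filter, List.mem_map]
  constructor
  · rintro ⟨⟨dir, hd, rfl⟩, hv⟩
    exact ⟨⟨dir, hd, rfl⟩, hv⟩
  · rintro ⟨⟨dir, hd, rfl⟩, hv⟩
    exact ⟨⟨dir, hd, rfl⟩, hv⟩

lemma pvDirs_neg_mem (dir : Int × Int) (h : dir ∈ pvDirs) : (-dir.1, -dir.2) ∈ pvDirs := by
  simp only [pvDirs, List.mem_cons, List.not_mem_nil, or_false] at h ⊢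
  rcases h with rfl | rfl | rfl | rfl <;> decide

lemma pvCand_closure (forest : List (List Int)) (rows cols : Int) (s : Int × Int)
    (k : Nat) (w z : Int × Int) (hw : w ∈ (pvUF forest rows cols s k).2)
    (hz : z ∈ pvCandL forest rows cols w.1 w.2) :
    ∃ j ≤ k + 1, z ∈ (pvUF forest rows cols s j).2 := by
  by_cases hU : z ∈ (pvUF forest rows cols s k).1 ∪ (pvUF forest rows cols s k).2
  · rcases Finset.mem_union.1 hU with h | h
    · obtain ⟨j, hj1, hj2⟩ := pvUF_mem_U forest rows cols s k z h
      exact ⟨j, by omega, hj2⟩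
    · exact ⟨k, by omega, h⟩
  · refine ⟨k + 1, le_refl _, ?_⟩
    simp only [pvUF, Finset.mem_sdiff]
    exact ⟨(mem_pvNf forest rows cols _ z).2 ⟨w, hw, hz⟩, hU⟩

-- ---------- characterisation of B's relaxation ----------

lemma mget_bInit (rows cols inf sr sc i j : Int)
    (hs : pvInB rows cols (sr, sc)) (hz : pvInB rows cols (i, j)) :
    mgetV (bInit rows cols inf sr sc) i j = if i = sr ∧ j = sc then 0 else inf := by
  obtain ⟨hsr, hsrlt, hsc, hsclt⟩ := hs
  obtain ⟨hi, hilt, hj, hjlt⟩ := hz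
  simp only at hsr hsrlt hsc hsclt hi hilt hj hjlt
  unfold mgetV bInit
  rw [PySem.List.pySetD_of_nonneg _ _ hsr, PySem.List.pySetD_of_nonneg _ _ hsc,
    PySem.List.pyGetD_of_nonneg _ _ hsr, PySem.List.pyGetD_of_nonneg _ _ hi,
    PySem.List.pyGetD_of_nonneg _ _ hj]
  have hR : sr.toNat < rows.toNat := by omega
  have hrow : (List.replicate rows.toNat (List.replicate cols.toNat inf)).getD sr.toNat [] =
      List.replicate cols.toNat inf := by
    simp [List.getD, hR]
  rw [hrow]
  simp only [List.getD, List.getElem?_set, List.getElem?_replicate, List.length_replicate]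
  by_cases hii : sr.toNat = i.toNat
  · rw [if_pos hii, if_pos hR]
    simp only [Option.getD_some, List.getElem?_set, List.getElem?_replicate,
      List.length_replicate]
    by_cases hjj : sc.toNat = j.toNat
    · rw [if_pos hjj, if_pos (by omega : sc.toNat < cols.toNat)]
      rw [if_pos (⟨by omega, by omega⟩ : i = sr ∧ j = sc)]
      rfl
    · rw [if_neg hjj, if_pos (by omega : j.toNat < cols.toNat)]
      rw [if_neg (by omega : ¬ (i = sr ∧ j = sc))]
      rfl
  · rw [if_neg hii, if_pos (by omega : i.toNat < rows.toNat)]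
    simp only [Option.getD_some, List.getElem?_replicate]
    rw [if_pos (by omega : j.toNat < cols.toNat)]
    rw [if_neg (by omega : ¬ (i = sr ∧ j = sc))]
    rfl

lemma mget_bStep (forest : List (List Int)) (rows cols : Int) (d : List (List Int))
    (i j : Int) (hz : pvInB rows cols (i, j)) :
    mgetV (bStep forest rows cols d) i j = bCell forest rows cols d i j := by
  obtain ⟨hi, hilt, hj, hjlt⟩ := hz
  simp only at hi hilt hj hjlt
  unfold mgetV bStep
  rw [PySem.List.pyGetD_map_pyRange_of_nonneg _ _ _ _ hi hilt,
    PySem.List.pyGetD_map_pyRange_of_nonneg _ _ _ _ hj hjlt]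

lemma bNbr_min (rows cols : Int) (d : List (List Int)) (i j : Int) :
    ∀ (D : List (Int × Int)) (best : Int),
      bNbr rows cols d i j best D ≤ best ∧
      (∀ dir ∈ D, pvInB rows cols (i + dir.1, j + dir.2) →
        bNbr rows cols d i j best D ≤ mgetV d (i + dir.1) (j + dir.2) + 1) ∧
      (bNbr rows cols d i j best D = best ∨
        ∃ dir ∈ D, pvInB rows cols (i + dir.1, j + dir.2) ∧
          bNbr rows cols d i j best D = mgetV d (i + dir.1) (j + dir.2) + 1) := by
  intro D
  induction D with
  | nil => intro best; exact ⟨le_refl _, by simp, Or.inl rfl⟩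
  | cons dir rest ih =>
    intro best
    by_cases hg : 0 ≤ i + dir.1 ∧ i + dir.1 < rows ∧ 0 ≤ j + dir.2 ∧ j + dir.2 < cols ∧
        mgetV d (i + dir.1) (j + dir.2) + 1 < best
    · have hstep : bNbr rows cols d i j best (dir :: rest) =
          bNbr rows cols d i j (mgetV d (i + dir.1) (j + dir.2) + 1) rest := by
        simp only [bNbr]
        rw [if_pos hg]
      rw [hstep]
      obtain ⟨h1, h2, h3⟩ := ih (mgetV d (i + dir.1) (j + dir.2) + 1)
      refine ⟨by omega, ?_, ?_⟩
      · intro dir' hd' hin'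
        rcases List.mem_cons.1 hd' with rfl | hd2
        · omega
        · exact h2 dir' hd2 hin'
      · rcases h3 with h | ⟨dir', hd', hin', he⟩
        · exact Or.inr ⟨dir, List.mem_cons_self, ⟨hg.1, hg.2.1, hg.2.2.1, hg.2.2.2.1⟩, h⟩
        · exact Or.inr ⟨dir', List.mem_cons_of_mem _ hd', hin', he⟩
    · have hstep : bNbr rows cols d i j best (dir :: rest) =
          bNbr rows cols d i j best rest := by
        simp only [bNbr]
        rw [if_neg hg]
      rw [hstep]
      obtain ⟨h1, h2, h3⟩ := ih best
      refine ⟨h1, ?_, ?_⟩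
      · intro dir' hd' hin'
        rcases List.mem_cons.1 hd' with rfl | hd2
        · have hnl : ¬ mgetV d (i + dir'.1) (j + dir'.2) + 1 < best := by
            intro hlt
            exact hg ⟨hin'.1, hin'.2.1, hin'.2.2.1, hin'.2.2.2, hlt⟩
          omega
        · exact h2 dir' hd2 hin'
      · rcases h3 with h | ⟨dir', hd', hin', he⟩
        · exact Or.inl h
        · exact Or.inr ⟨dir', List.mem_cons_of_mem _ hd', hin', he⟩

-- the invariant: after t sweeps the table holds the BFS-layer index (≤ t) or INF
def TSpec (forest : List (List Int)) (rows cols : Int) (s : Int × Int) (t : Nat)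
    (d : List (List Int)) : Prop :=
  ∀ z : Int × Int, pvInB rows cols z →
    (∀ k, k ≤ t → z ∈ (pvUF forest rows cols s k).2 → mgetV d z.1 z.2 = (k : Int)) ∧
    ((¬ ∃ k, k ≤ t ∧ z ∈ (pvUF forest rows cols s k).2) →
      mgetV d z.1 z.2 = rows * cols + 1)

lemma TSpec_zero (forest : List (List Int)) (rows cols : Int) (s : Int × Int)
    (hs : pvInB rows cols s) :
    TSpec forest rows cols s 0 (bInit rows cols (rows * cols + 1) s.1 s.2) := by
  intro z hz
  have hspair : pvInB rows cols ((s.1, s.2) : Int × Int) := hs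
  have hini := mget_bInit rows cols (rows * cols + 1) s.1 s.2 z.1 z.2 hspair hz
  constructor
  · intro k hk hmem
    have hk0 : k = 0 := by omega
    subst hk0
    simp only [pvUF, Finset.mem_singleton] at hmem
    rw [hini, if_pos ⟨by rw [hmem], by rw [hmem]⟩]
    rfl
  · intro hno
    have hzs : ¬ (z.1 = s.1 ∧ z.2 = s.2) := by
      rintro ⟨h1, h2⟩
      refine hno ⟨0, le_refl 0, ?_⟩
      simp only [pvUF, Finset.mem_singleton]
      exact Prod.ext_iff.2 ⟨h1, h2⟩
    rw [hini, if_neg hzs]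

lemma TSpec_step (forest : List (List Int)) (rows cols : Int) (s : Int × Int) (t : Nat)
    (d : List (List Int)) (hs : pvInB rows cols s) (hr : 0 ≤ rows) (hc : 0 ≤ cols)
    (hd : TSpec forest rows cols s t d) :
    TSpec forest rows cols s (t + 1) (bStep forest rows cols d) := by
  intro z hz
  obtain ⟨zi, zj⟩ := z
  have hstep := mget_bStep forest rows cols d zi zj hz
  have hrcInt : ((rows * cols).toNat : Int) = rows * cols :=
    Int.toNat_of_nonneg (mul_nonneg hr hc)
  by_cases hval : pvGetF forest zi zj = 0
  · -- B copies the entry of a blocked cell; such a cell is in no layer ≥ 1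
    have hcell : bCell forest rows cols d zi zj = mgetV d zi zj := by
      simp only [bCell]
      rw [if_pos hval]
    obtain ⟨hc1, hc2⟩ := hd (zi, zj) hz
    constructor
    · intro k hk hmem
      rcases Nat.lt_or_ge k (t + 1) with hk1 | hk1
      · rw [hstep, hcell]
        exact hc1 k (by omega) hmem
      · exfalso
        have hke : k = t + 1 := by omega
        subst hke
        have hvB := pvUF_valid forest rows cols s t (zi, zj) hmem
        simp only [pvValid, decide_eq_true_eq] at hvB
        exact hvB.2.2.2.2 hval
    · intro hno
      rw [hstep, hcell]
      exact hc2 (fun ⟨k, hk, hm⟩ => hno ⟨k, by omega, hm⟩)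
  · -- an open cell is relaxed over its four neighbours
    have hvB : pvValid forest rows cols ((zi, zj) : Int × Int) = true := by
      simp only [pvValid, decide_eq_true_eq]
      exact ⟨hz.1, hz.2.1, hz.2.2.1, hz.2.2.2, hval⟩
    have hcell : bCell forest rows cols d zi zj =
        bNbr rows cols d zi zj (mgetV d zi zj) pvDirs := by
      simp only [bCell]
      rw [if_neg hval]
    obtain ⟨hb1, hb2, hb3⟩ := bNbr_min rows cols d zi zj pvDirs (mgetV d zi zj)
    obtain ⟨hs1, hs2⟩ := hd (zi, zj) hz
    -- z is a candidate of each of its in-bounds neighbours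
    have hzcand : ∀ dir ∈ pvDirs,
        ((zi, zj) : Int × Int) ∈ pvCandL forest rows cols (zi + dir.1) (zj + dir.2) := by
      intro dir hdir
      rw [mem_pvCandL_iff]
      refine ⟨⟨(-dir.1, -dir.2), pvDirs_neg_mem dir hdir, ?_⟩, hvB⟩
      simp only [Prod.mk.injEq]
      constructor <;> ring
    constructor
    · intro k hk hmem
      have hne : (pvUF forest rows cols s k).2 ≠ ∅ := by
        intro he
        rw [he] at hmem
        exact absurd hmem (Finset.notMem_empty _)
      have hkle : k ≤ (rows * cols).toNat := pvUF_k_le forest rows cols s hs hr hc k hne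
      -- every in-bounds neighbour entry + 1 is at least k
      have hcand_ge : ∀ dir ∈ pvDirs, pvInB rows cols (zi + dir.1, zj + dir.2) →
          (k : Int) ≤ mgetV d (zi + dir.1) (zj + dir.2) + 1 := by
        intro dir hdir hin
        obtain ⟨hn1, hn2⟩ := hd (zi + dir.1, zj + dir.2) hin
        by_cases hw : ∃ k', k' ≤ t ∧
            ((zi + dir.1, zj + dir.2) : Int × Int) ∈ (pvUF forest rows cols s k').2
        · obtain ⟨k', hk', hm'⟩ := hw
          rw [hn1 k' hk' hm']
          obtain ⟨jj, hjj, hjm⟩ := pvCand_closure forest rows cols s k' _ (zi, zj) hm'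
            (hzcand dir hdir)
          have hje := pvUF_layer_unique forest rows cols s jj k (zi, zj) hjm hmem
          omega
        · rw [hn2 hw]
          omega
      -- upper bound
      have hub : bNbr rows cols d zi zj (mgetV d zi zj) pvDirs ≤ (k : Int) := by
        rcases Nat.lt_or_ge k (t + 1) with hk1 | hk1
        · have hbest := hs1 k (by omega) hmem
          calc bNbr rows cols d zi zj (mgetV d zi zj) pvDirs ≤ mgetV d zi zj := hb1
            _ = (k : Int) := hbest
        · have hke : k = t + 1 := by omega
          subst hke
          -- z sits in layer t+1: it has a neighbour in layer t
          have hmem' := hmem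
          simp only [pvUF, Finset.mem_sdiff] at hmem'
          obtain ⟨w, hwF, hzw⟩ := (mem_pvNf forest rows cols _ _).1 hmem'.1
          obtain ⟨⟨dir0, hd0, hze⟩, -⟩ := (mem_pvCandL_iff forest rows cols w.1 w.2 _).1 hzw
          have hwin : pvInB rows cols w := (pvUF_inB forest rows cols s hs t).2 w hwF
          have hwval : mgetV d w.1 w.2 = (t : Int) :=
            (hd w hwin).1 t (le_refl t) hwF
          have hweq : w = ((zi + (-dir0.1), zj + (-dir0.2)) : Int × Int) := by
            have h1 : zi = w.1 + dir0.1 := congrArg Prod.fst hze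
            have h2 : zj = w.2 + dir0.2 := congrArg Prod.snd hze
            have hwp : w = (w.1, w.2) := rfl
            rw [hwp]
            simp only [Prod.mk.injEq]
            omega
          have hw1 : w.1 = zi + -dir0.1 := by rw [hweq]
          have hw2 : w.2 = zj + -dir0.2 := by rw [hweq]
          have hb2' := hb2 (-dir0.1, -dir0.2) (pvDirs_neg_mem dir0 hd0)
            (by
              have hpe : ((zi + ((-dir0.1, -dir0.2) : Int × Int).1,
                  zj + ((-dir0.1, -dir0.2) : Int × Int).2) : Int × Int) = w := by
                rw [hweq]
              rw [hpe]
              exact hwin)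
          have hb2'' : bNbr rows cols d zi zj (mgetV d zi zj) pvDirs ≤
              mgetV d w.1 w.2 + 1 := by
            rw [hw1, hw2]
            exact hb2'
          rw [hwval] at hb2''
          push_cast
          omega
      -- lower bound
      have hlb : (k : Int) ≤ bNbr rows cols d zi zj (mgetV d zi zj) pvDirs := by
        rcases hb3 with h | ⟨dir', hd', hin', he⟩
        · rw [h]
          by_cases hw : ∃ k', k' ≤ t ∧ ((zi, zj) : Int × Int) ∈ (pvUF forest rows cols s k').2
          · obtain ⟨k', hk', hm'⟩ := hw
            have hke := pvUF_layer_unique forest rows cols s k' k (zi, zj) hm' hmem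
            rw [hs1 k' hk' hm']
            omega
          · rw [hs2 hw]
            omega
        · rw [he]
          exact hcand_ge dir' hd' hin'
      rw [hstep, hcell]
      omega
    · intro hno
      have hbest : mgetV d zi zj = rows * cols + 1 :=
        hs2 (fun ⟨k, hk, hm⟩ => hno ⟨k, by omega, hm⟩)
      have hres : bNbr rows cols d zi zj (mgetV d zi zj) pvDirs = mgetV d zi zj := by
        rcases hb3 with h | ⟨dir', hd', hin', he⟩
        · exact h
        · exfalso
          obtain ⟨hn1, hn2⟩ := hd (zi + dir'.1, zj + dir'.2) hin'
          by_cases hw : ∃ k', k' ≤ t ∧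
              ((zi + dir'.1, zj + dir'.2) : Int × Int) ∈ (pvUF forest rows cols s k').2
          · obtain ⟨k', hk', hm'⟩ := hw
            obtain ⟨jj, hjj, hjm⟩ := pvCand_closure forest rows cols s k' _ (zi, zj) hm'
              (hzcand dir' hd')
            exact hno ⟨jj, by omega, hjm⟩
          · rw [hn2 hw] at he
            rw [he] at hb1
            rw [hbest] at hb1
            omega
      rw [hstep, hcell, hres, hbest]

lemma TSpec_iter (forest : List (List Int)) (rows cols : Int) (s : Int × Int)
    (hs : pvInB rows cols s) (hr : 0 ≤ rows) (hc : 0 ≤ cols) :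
    ∀ t, TSpec forest rows cols s t
      ((bStep forest rows cols)^[t] (bInit rows cols (rows * cols + 1) s.1 s.2)) := by
  intro t
  induction t with
  | zero => exact TSpec_zero forest rows cols s hs
  | succ t ih =>
    rw [Function.iterate_succ_apply']
    exact TSpec_step forest rows cols s t _ hs hr hc ih

lemma bLoop_eq_iterate (forest : List (List Int)) (rows cols : Int) :
    ∀ (t : Nat) (d : List (List Int)),
      bLoop forest rows cols t d = (bStep forest rows cols)^[t] d := by
  intro t
  induction t with
  | zero => intro d; rfl
  | succ t ih =>
    intro d
    show (if bStep forest rows cols d = d then d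
      else bLoop forest rows cols t (bStep forest rows cols d)) = _
    by_cases h : bStep forest rows cols d = d
    · rw [if_pos h, Function.iterate_fixed h]
    · rw [if_neg h, ih, ← Function.iterate_succ_apply]

lemma bDist_char (forest : List (List Int)) (rows cols : Int) (s : Int × Int) (tr tc : Int)
    (hs : pvInB rows cols s) (ht : pvInB rows cols (tr, tc)) (hr : 0 ≤ rows) (hc : 0 ≤ cols) :
    (∀ h : ∃ k, ((tr, tc) : Int × Int) ∈ (pvUF forest rows cols s k).2,
      bDist forest rows cols (rows * cols + 1) s.1 s.2 tr tc = (Nat.find h : Int)) ∧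
    ((¬ ∃ k, ((tr, tc) : Int × Int) ∈ (pvUF forest rows cols s k).2) →
      bDist forest rows cols (rows * cols + 1) s.1 s.2 tr tc = -1) := by
  have hrcInt : ((rows * cols).toNat : Int) = rows * cols :=
    Int.toNat_of_nonneg (mul_nonneg hr hc)
  obtain ⟨hT1, hT2⟩ := TSpec_iter forest rows cols s hs hr hc (rows * cols).toNat (tr, tc) ht
  constructor
  · intro h
    have hfind := Nat.find_spec h
    have hne : (pvUF forest rows cols s (Nat.find h)).2 ≠ ∅ := by
      intro he
      rw [he] at hfind
      exact absurd hfind (Finset.notMem_empty _)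
    have hle : Nat.find h ≤ (rows * cols).toNat :=
      pvUF_k_le forest rows cols s hs hr hc _ hne
    have hval := hT1 (Nat.find h) hle hfind
    simp only at hval
    have hbd : bDist forest rows cols (rows * cols + 1) s.1 s.2 tr tc =
        (if mgetV ((bStep forest rows cols)^[(rows * cols).toNat]
            (bInit rows cols (rows * cols + 1) s.1 s.2)) tr tc < rows * cols + 1
         then mgetV ((bStep forest rows cols)^[(rows * cols).toNat]
            (bInit rows cols (rows * cols + 1) s.1 s.2)) tr tc
         else -1) := by
      unfold bDist
      rw [bLoop_eq_iterate]
    rw [hbd, hval, if_pos (by omega)]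
  · intro hno
    have hval := hT2 (fun ⟨k, _, hm⟩ => hno ⟨k, hm⟩)
    simp only at hval
    have hbd : bDist forest rows cols (rows * cols + 1) s.1 s.2 tr tc =
        (if mgetV ((bStep forest rows cols)^[(rows * cols).toNat]
            (bInit rows cols (rows * cols + 1) s.1 s.2)) tr tc < rows * cols + 1
         then mgetV ((bStep forest rows cols)^[(rows * cols).toNat]
            (bInit rows cols (rows * cols + 1) s.1 s.2)) tr tc
         else -1) := by
      unfold bDist
      rw [bLoop_eq_iterate]
    rw [hbd, hval, if_neg (by omega)]

lemma bDist_self (forest : List (List Int)) (rows cols pr pc : Int)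
    (hin : pvInB rows cols ((pr, pc) : Int × Int)) (hr : 0 ≤ rows) (hc : 0 ≤ cols) :
    bDist forest rows cols (rows * cols + 1) pr pc pr pc = 0 := by
  have hmem0 : ((pr, pc) : Int × Int) ∈ (pvUF forest rows cols ((pr, pc) : Int × Int) 0).2 := by
    simp [pvUF]
  have h : ∃ k, ((pr, pc) : Int × Int) ∈ (pvUF forest rows cols ((pr, pc) : Int × Int) k).2 :=
    ⟨0, hmem0⟩
  have hch := (bDist_char forest rows cols ((pr, pc) : Int × Int) pr pc hin hin hr hc).1 h
  simp only at hch
  rw [hch]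
  have hf0 : Nat.find h = 0 := Nat.le_zero.1 (Nat.find_le hmem0)
  rw [hf0]
  rfl

-- ---------- the two inner searches agree ----------

lemma inner_equiv (forest : List (List Int)) (rows cols : Int) (s : Int × Int) (r c res : Int)
    (hs : pvInB rows cols s) (htin : pvInB rows cols ((r, c) : Int × Int))
    (hr : 0 ≤ rows) (hc : 0 ≤ cols) :
    aWhile forest rows cols r c ((rows * cols).toNat + 3) [s]
        (List.replicate rows.toNat (List.replicate cols.toNat 0)) res 0 false =
      (if bDist forest rows cols (rows * cols + 1) s.1 s.2 r c = -1 then (res, false)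
       else (res + bDist forest rows cols (rows * cols + 1) s.1 s.2 r c, true)) := by
  by_cases hst : s.1 = r ∧ s.2 = c
  · -- the start already is the target: A pops it at level 0, B's table keeps 0 there
    have hseq : s = ((r, c) : Int × Int) := Prod.ext_iff.2 ⟨hst.1, hst.2⟩
    have hd0 : bDist forest rows cols (rows * cols + 1) s.1 s.2 r c = 0 := by
      rw [hseq]
      exact bDist_self forest rows cols r c (hseq ▸ hs) hr hc
    rw [hd0]
    simp only [if_neg (by omega : ¬ (0 : Int) = -1), add_zero]
    have hrc : pvInB rows cols ((r, c) : Int × Int) := hseq ▸ hs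
    have hfe : (rows * cols).toNat + 3 = ((rows * cols).toNat + 2) + 1 := rfl
    rw [hseq, hfe]
    have hne : ([((r, c) : Int × Int)]) ≠ [] := by simp
    conv_lhs => rw [aWhile]
    rw [if_neg hne]
    have hpop := aStackLoop_pop forest rows cols r c 0 []
      (⟨[], List.replicate rows.toNat (List.replicate cols.toNat 0), res, false⟩ : AState)
      ∅ (MRepr_init rows cols) hrc (by simp) (by simp)
    simp only [List.nil_append] at hpop
    show aWhile forest rows cols r c ((rows * cols).toNat + 2)
        (aStackLoop forest rows cols r c 0 [(r, c)]
          ⟨[], List.replicate rows.toNat (List.replicate cols.toNat 0), res, false⟩).newStack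
        (aStackLoop forest rows cols r c 0 [(r, c)]
          ⟨[], List.replicate rows.toNat (List.replicate cols.toNat 0), res, false⟩).visited
        (aStackLoop forest rows cols r c 0 [(r, c)]
          ⟨[], List.replicate rows.toNat (List.replicate cols.toNat 0), res, false⟩).res (0 + 1)
        (aStackLoop forest rows cols r c 0 [(r, c)]
          ⟨[], List.replicate rows.toNat (List.replicate cols.toNat 0), res, false⟩).flag =
      (res, true)
    rw [hpop.1, hpop.2.1]
    exact aWhile_flood forest rows cols r c hrc.1 hrc.2.2.1 _ _ _ _ _ hpop.2.2.2 hpop.2.2.1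
  · -- distinct start and target: A walks the layers, B's fixpoint table names them
    have hne0 : ((r, c) : Int × Int) ∉ (pvUF forest rows cols s 0).2 := by
      simp only [pvUF, Finset.mem_singleton]
      intro h
      exact hst ⟨(congrArg Prod.fst h).symm, (congrArg Prod.snd h).symm⟩
    have hnot0 : ∀ j ≤ 0, ((r, c) : Int × Int) ∉ (pvUF forest rows cols s j).2 := by
      intro j hj
      have : j = 0 := by omega
      subst this
      exact hne0
    have hA := aWhile_main forest rows cols r c s hs hr hc ((rows * cols).toNat + 3) 0 [s]
      (List.replicate rows.toNat (List.replicate cols.toNat 0)) res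
      (by simpa [pvUF] using MRepr_init rows cols)
      (by simp [pvUF])
      (by
        intro z hz
        rcases List.mem_singleton.1 hz with rfl
        refine ⟨hs, ?_⟩
        have := pvPar01 z
        simp
        omega)
      hnot0 (by omega)
    have hB := bDist_char forest rows cols s r c hs htin hr hc
    by_cases hreach : ∃ j, ((r, c) : Int × Int) ∈ (pvUF forest rows cols s j).2
    · have hA1 := hA.1 hreach
      have hB1 := hB.1 hreach
      rw [Nat.cast_zero] at hA1
      rw [hA1, hB1]
      have : ¬ ((Nat.find hreach : Int)) = -1 := by
        have : (0 : Int) ≤ (Nat.find hreach : Int) := Int.natCast_nonneg _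
        omega
      rw [if_neg this]
    · have hA2 := hA.2 hreach
      have hB2 := hB.2 hreach
      rw [Nat.cast_zero] at hA2
      rw [hA2, hB2]
      simp
-- ---------- the outer loops agree ----------

def DictGood (rows cols : Int) (d : PySem.Dict Int (Int × Int)) : Prop :=
  ∀ v p, d.get? v = some p → pvInB rows cols p

def dcL : List Int → List Int
  | [] => []
  | [a] => [a]
  | a :: b :: l => if a = b then dcL (b :: l) else a :: dcL (b :: l)

lemma mem_dcL : ∀ (l : List Int) (z : Int), z ∈ dcL l ↔ z ∈ l := by
  intro l
  induction l using dcL.induct with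
  | case1 => simp [dcL]
  | case2 a => simp [dcL]
  | case3 b l ih => intro z; rw [dcL, if_pos rfl, ih z]; simp
  | case4 a b l hab ih => intro z; rw [dcL, if_neg hab]; simp [ih z]

lemma dcL_pairwise : ∀ l : List Int, l.Pairwise (· ≤ ·) → (dcL l).Pairwise (· < ·) := by
  intro l
  induction l using dcL.induct with
  | case1 => intro _; simp [dcL]
  | case2 a => intro _; simp [dcL]
  | case3 b l ih => intro hp; rw [dcL, if_pos rfl]; exact ih hp.tail
  | case4 a b l hab ih =>
    intro hp
    rw [dcL, if_neg hab]
    refine List.Pairwise.cons ?_ (ih hp.tail)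
    intro z hz
    have hz2 : z ∈ b :: l := (mem_dcL _ z).1 hz
    have hle : a ≤ z := List.rel_of_pairwise_cons hp hz2
    rcases List.mem_cons.1 hz2 with rfl | hz3
    · omega
    · have hble : b ≤ z := List.rel_of_pairwise_cons hp.tail hz3
      have hab2 : a ≤ b := List.rel_of_pairwise_cons hp List.mem_cons_self
      by_contra hlt
      have : a = b := by omega
      exact hab this

lemma dcL_cons : ∀ (l : List Int) (a : Int), ∃ l', dcL (a :: l) = a :: l' := by
  intro l
  induction l with
  | nil => intro a; exact ⟨[], rfl⟩
  | cons b l ih =>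
    intro a
    by_cases hab : a = b
    · subst hab
      obtain ⟨l', hl'⟩ := ih a
      exact ⟨l', by rw [dcL, if_pos rfl]; exact hl'⟩
    · exact ⟨dcL (b :: l), by rw [dcL, if_neg hab]⟩

lemma aOuter_cons (forest : List (List Int)) (rows cols : Int)
    (mapping : PySem.Dict Int (Int × Int)) (v : Int) (rest : List Int) (p : Int × Int)
    (pr pc res : Int) (hp : mapping.getD v (0, 0) = p)
    (hin : pvInB rows cols ((pr, pc) : Int × Int)) (hpin : pvInB rows cols p)
    (hr : 0 ≤ rows) (hc : 0 ≤ cols) :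
    aOuter forest rows cols mapping (v :: rest) pr pc res =
      (if bDist forest rows cols (rows * cols + 1) pr pc p.1 p.2 = -1 then -1
       else aOuter forest rows cols mapping rest p.1 p.2
         (res + bDist forest rows cols (rows * cols + 1) pr pc p.1 p.2)) := by
  simp only [aOuter, hp]
  have hpin' : pvInB rows cols ((p.1, p.2) : Int × Int) := hpin
  have hie := inner_equiv forest rows cols ((pr, pc) : Int × Int) p.1 p.2 res hin hpin' hr hc
  simp only at hie
  rw [hie]
  by_cases hfail : bDist forest rows cols (rows * cols + 1) pr pc p.1 p.2 = -1
  · rw [if_pos hfail, if_pos hfail]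
    simp
  · rw [if_neg hfail, if_neg hfail]
    simp

lemma bOuter_cons (forest : List (List Int)) (rows cols inf : Int)
    (trees : PySem.Dict Int (Int × Int)) (v : Int) (rest : List Int) (p : Int × Int)
    (pr pc res : Int) (hp : trees.getD v (0, 0) = p) :
    bOuter forest rows cols inf trees (v :: rest) pr pc res =
      (if bDist forest rows cols inf pr pc p.1 p.2 = -1 then -1
       else bOuter forest rows cols inf trees rest p.1 p.2
         (res + bDist forest rows cols inf pr pc p.1 p.2)) := by
  simp only [bOuter, hp]

lemma outer_equiv (forest : List (List Int)) (rows cols : Int)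
    (mapping : PySem.Dict Int (Int × Int)) (hr : 0 ≤ rows) (hc : 0 ≤ cols)
    (hgood : DictGood rows cols mapping) :
    ∀ l : List Int, l.Pairwise (· ≤ ·) → (∀ v ∈ l, ∃ p, mapping.get? v = some p) →
      ∀ pr pc res, pvInB rows cols ((pr, pc) : Int × Int) →
        aOuter forest rows cols mapping l pr pc res =
          bOuter forest rows cols (rows * cols + 1) mapping (dcL l) pr pc res := by
  intro l
  induction l using dcL.induct with
  | case1 => intro _ _ pr pc res _; rfl
  | case2 a =>
    intro _ hkeys pr pc res hin
    obtain ⟨p, hp⟩ := hkeys a List.mem_cons_self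
    have hpD : mapping.getD a (0, 0) = p := PySem.Dict.getD_of_get?_eq_some mapping _ hp
    have hpin : pvInB rows cols p := hgood a p hp
    rw [show dcL [a] = [a] from rfl,
      aOuter_cons forest rows cols mapping a [] p pr pc res hpD hin hpin hr hc,
      bOuter_cons forest rows cols (rows * cols + 1) mapping a [] p pr pc res hpD]
    by_cases hfail : bDist forest rows cols (rows * cols + 1) pr pc p.1 p.2 = -1
    · rw [if_pos hfail, if_pos hfail]
    · rw [if_neg hfail, if_neg hfail]
      rfl
  | case3 b l ih =>
    intro hpw hkeys pr pc res hin
    obtain ⟨p, hp⟩ := hkeys b List.mem_cons_self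
    have hpD : mapping.getD b (0, 0) = p := PySem.Dict.getD_of_get?_eq_some mapping _ hp
    have hpin : pvInB rows cols p := hgood b p hp
    obtain ⟨l'', hdc2⟩ := dcL_cons l b
    have hdc : dcL (b :: b :: l) = dcL (b :: l) := by rw [dcL, if_pos rfl]
    rw [hdc, hdc2,
      aOuter_cons forest rows cols mapping b (b :: l) p pr pc res hpD hin hpin hr hc,
      bOuter_cons forest rows cols (rows * cols + 1) mapping b l'' p pr pc res hpD]
    by_cases hfail : bDist forest rows cols (rows * cols + 1) pr pc p.1 p.2 = -1
    · rw [if_pos hfail, if_pos hfail]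
    · rw [if_neg hfail, if_neg hfail]
      have hihs := ih hpw.tail (fun v hv => hkeys v (List.mem_cons_of_mem _ hv)) p.1 p.2
        (res + bDist forest rows cols (rows * cols + 1) pr pc p.1 p.2) (by simpa using hpin)
      rw [hihs, hdc2,
        bOuter_cons forest rows cols (rows * cols + 1) mapping b l'' p p.1 p.2 _ hpD,
        bDist_self forest rows cols p.1 p.2 (by simpa using hpin) hr hc]
      rw [if_neg (by omega : ¬ (0 : Int) = -1)]
      simp
  | case4 a b l hab ih =>
    intro hpw hkeys pr pc res hin
    obtain ⟨p, hp⟩ := hkeys a List.mem_cons_self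
    have hpD : mapping.getD a (0, 0) = p := PySem.Dict.getD_of_get?_eq_some mapping _ hp
    have hpin : pvInB rows cols p := hgood a p hp
    have hdc : dcL (a :: b :: l) = a :: dcL (b :: l) := by rw [dcL, if_neg hab]
    rw [hdc,
      aOuter_cons forest rows cols mapping a (b :: l) p pr pc res hpD hin hpin hr hc,
      bOuter_cons forest rows cols (rows * cols + 1) mapping a (dcL (b :: l)) p pr pc res hpD]
    by_cases hfail : bDist forest rows cols (rows * cols + 1) pr pc p.1 p.2 = -1
    · rw [if_pos hfail, if_pos hfail]
    · rw [if_neg hfail, if_neg hfail]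
      exact ih hpw.tail (fun v hv => hkeys v (List.mem_cons_of_mem _ hv)) p.1 p.2
        (res + bDist forest rows cols (rows * cols + 1) pr pc p.1 p.2) (by simpa using hpin)

-- ---------- the tree-collection folds agree ----------

lemma foldl_snd {α β γ : Type} (f : β × γ → α → β × γ) (g : γ → α → γ)
    (h : ∀ p x, (f p x).2 = g p.2 x) :
    ∀ (l : List α) (p : β × γ), (l.foldl f p).2 = l.foldl g p.2 := by
  intro l
  induction l with
  | nil => intro p; rfl
  | cons x xs ih => intro p; simp only [List.foldl_cons, ih, h]

lemma build_inner (forest : List (List Int)) (rows cols i : Int) (hi : 0 ≤ i ∧ i < rows) :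
    ∀ (lj : List Int) (st : List Int × PySem.Dict Int (Int × Int)),
      (∀ j ∈ lj, 0 ≤ j ∧ j < cols) →
      DictGood rows cols st.2 → st.2.keys = PySem.List.dedup st.1 →
      DictGood rows cols
        ((lj.foldl (fun st j =>
          if 1 < pvGetF forest i j then
            (st.1 ++ [pvGetF forest i j], st.2.insert (pvGetF forest i j) (i, j))
          else st) st)).2 ∧
      ((lj.foldl (fun st j =>
          if 1 < pvGetF forest i j then
            (st.1 ++ [pvGetF forest i j], st.2.insert (pvGetF forest i j) (i, j))
          else st) st)).2.keys =
        PySem.List.dedup ((lj.foldl (fun st j =>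
          if 1 < pvGetF forest i j then
            (st.1 ++ [pvGetF forest i j], st.2.insert (pvGetF forest i j) (i, j))
          else st) st)).1 := by
  intro lj
  induction lj with
  | nil => intro st _ h1 h2; exact ⟨h1, h2⟩
  | cons j lj ih =>
    intro st hjb hgood hkeys
    have hj := hjb j List.mem_cons_self
    simp only [List.foldl_cons]
    by_cases hv : 1 < pvGetF forest i j
    · rw [if_pos hv]
      refine ih _ (fun j' hj' => hjb j' (List.mem_cons_of_mem _ hj')) ?_ ?_
      · intro k p hk
        by_cases hkv : k = pvGetF forest i j
        · subst hkv
          rw [PySem.Dict.get?_insert_self] at hk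
          cases hk
          exact ⟨hi.1, hi.2, hj.1, hj.2⟩
        · rw [PySem.Dict.get?_insert_of_ne _ _ hkv] at hk
          exact hgood k p hk
      · simp only
        rw [PySem.List.dedup_eq_ofList, PySem.Set.ofList_append_singleton,
          ← PySem.List.dedup_eq_ofList]
        by_cases hc : st.2.contains (pvGetF forest i j) = true
        · rw [PySem.Dict.keys_insert_of_contains _ _ hc, hkeys,
            PySem.Set.add_of_mem]
          rw [← hkeys]
          exact (PySem.Dict.contains_iff_mem_keys _ _).1 hc
        · rw [PySem.Dict.keys_insert_of_not_contains _ _ (by simpa using hc), hkeys,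
            PySem.Set.add_of_not_mem]
          rw [← hkeys]
          intro hmem
          exact hc ((PySem.Dict.contains_iff_mem_keys _ _).2 hmem)
    · rw [if_neg hv]
      exact ih _ (fun j' hj' => hjb j' (List.mem_cons_of_mem _ hj')) hgood hkeys

lemma build_inv (forest : List (List Int)) (rows cols : Int) :
    ∀ (li : List Int) (st : List Int × PySem.Dict Int (Int × Int)),
      (∀ i ∈ li, 0 ≤ i ∧ i < rows) →
      DictGood rows cols st.2 → st.2.keys = PySem.List.dedup st.1 →
      DictGood rows cols
        ((li.foldl (fun st i =>
          (PySem.List.pyRange 0 cols 1).foldl (fun st j =>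
            if 1 < pvGetF forest i j then
              (st.1 ++ [pvGetF forest i j], st.2.insert (pvGetF forest i j) (i, j))
            else st) st) st)).2 ∧
      ((li.foldl (fun st i =>
          (PySem.List.pyRange 0 cols 1).foldl (fun st j =>
            if 1 < pvGetF forest i j then
              (st.1 ++ [pvGetF forest i j], st.2.insert (pvGetF forest i j) (i, j))
            else st) st) st)).2.keys =
        PySem.List.dedup ((li.foldl (fun st i =>
          (PySem.List.pyRange 0 cols 1).foldl (fun st j =>
            if 1 < pvGetF forest i j then
              (st.1 ++ [pvGetF forest i j], st.2.insert (pvGetF forest i j) (i, j))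
            else st) st) st)).1 := by
  intro li
  induction li with
  | nil => intro st _ h1 h2; exact ⟨h1, h2⟩
  | cons i li ih =>
    intro st hib hgood hkeys
    have hi := hib i List.mem_cons_self
    simp only [List.foldl_cons]
    have hstep := build_inner forest rows cols i hi (PySem.List.pyRange 0 cols 1) st
      (fun j hj => by
        have := PySem.List.mem_pyRange_one.1 hj
        exact ⟨this.1, this.2⟩)
      hgood hkeys
    exact ih _ (fun i' hi' => hib i' (List.mem_cons_of_mem _ hi')) hstep.1 hstep.2

lemma sorted_dedup_eq_dcL (pq : List Int) :
    PySem.List.sorted (PySem.List.dedup pq) (fun x => x) false =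
      dcL (PySem.List.sorted pq (fun x => x) false) := by
  have hpl : (dcL (PySem.List.sorted pq (fun x => x) false)).Pairwise (· < ·) := by
    apply dcL_pairwise
    have := PySem.List.sorted_pairwise pq (fun x => x)
    simpa using this
  have hnd1 : (dcL (PySem.List.sorted pq (fun x => x) false)).Nodup :=
    hpl.imp (fun h => ne_of_lt h)
  have hperm : (dcL (PySem.List.sorted pq (fun x => x) false)).Perm (PySem.List.dedup pq) := by
    apply List.perm_of_nodup_nodup_toFinset_eq hnd1 (PySem.List.nodup_dedup pq)
    ext z
    simp [mem_dcL, PySem.List.mem_sorted, PySem.List.mem_dedup]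
  exact PySem.List.sorted_eq_of_perm_of_pairwise_lt _ _ _ hperm hpl

-- ===== VERDICT (by name: the statement is the Claim_ definition above) =====
theorem cutOffTree_TLE_spec : Claim_equal_cutOffTree_TLE := by
  intro forest _ _
  unfold Spec_cutOffTree_TLE
  simp only [cutOffTree_TLE, cutOffTree_TLE_alt]
  have hr : (0 : Int) ≤ (forest.length : Int) := Int.natCast_nonneg _
  have hc : (0 : Int) ≤ ((PySem.List.pyGetD forest 0 []).length : Int) := Int.natCast_nonneg _
  -- B's dict is the second component of A's fold
  have hsnd : (PySem.List.pyRange 0 (forest.length : Int) 1).foldl (fun d i =>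
        (PySem.List.pyRange 0 ((PySem.List.pyGetD forest 0 []).length : Int) 1).foldl (fun d j =>
          if 1 < pvGetF forest i j then d.insert (pvGetF forest i j) (i, j) else d) d)
        PySem.Dict.empty =
      ((PySem.List.pyRange 0 (forest.length : Int) 1).foldl (fun st i =>
        (PySem.List.pyRange 0 ((PySem.List.pyGetD forest 0 []).length : Int) 1).foldl (fun st j =>
          if 1 < pvGetF forest i j then
            (st.1 ++ [pvGetF forest i j], st.2.insert (pvGetF forest i j) (i, j))
          else st) st) (([], PySem.Dict.empty) : List Int × PySem.Dict Int (Int × Int))).2 := by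
    rw [foldl_snd (fun st i =>
        (PySem.List.pyRange 0 ((PySem.List.pyGetD forest 0 []).length : Int) 1).foldl (fun st j =>
          if 1 < pvGetF forest i j then
            (st.1 ++ [pvGetF forest i j], st.2.insert (pvGetF forest i j) (i, j))
          else st) st)
      (fun d i =>
        (PySem.List.pyRange 0 ((PySem.List.pyGetD forest 0 []).length : Int) 1).foldl (fun d j =>
          if 1 < pvGetF forest i j then d.insert (pvGetF forest i j) (i, j) else d) d)
      ?_ _ (([], PySem.Dict.empty) : List Int × PySem.Dict Int (Int × Int))]
    intro p i
    rw [foldl_snd (fun st j =>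
        if 1 < pvGetF forest i j then
          (st.1 ++ [pvGetF forest i j], st.2.insert (pvGetF forest i j) (i, j))
        else st)
      (fun d j => if 1 < pvGetF forest i j then d.insert (pvGetF forest i j) (i, j) else d)
      ?_ _ p]
    intro q j
    dsimp only
    by_cases hv : 1 < pvGetF forest i j
    · rw [if_pos hv, if_pos hv]
    · rw [if_neg hv, if_neg hv]
  rw [hsnd]
  have hbuild := build_inv forest (forest.length : Int)
    ((PySem.List.pyGetD forest 0 []).length : Int)
    (PySem.List.pyRange 0 (forest.length : Int) 1)
    (([], PySem.Dict.empty) : List Int × PySem.Dict Int (Int × Int))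
    (fun i hi => by
      have := PySem.List.mem_pyRange_one.1 hi
      exact ⟨this.1, this.2⟩)
    (fun v p hp => by rw [PySem.Dict.get?_empty] at hp; cases hp)
    (by rw [PySem.Dict.keys_empty]; rfl)
  set bst := (PySem.List.pyRange 0 (forest.length : Int) 1).foldl (fun st i =>
        (PySem.List.pyRange 0 ((PySem.List.pyGetD forest 0 []).length : Int) 1).foldl (fun st j =>
          if 1 < pvGetF forest i j then
            (st.1 ++ [pvGetF forest i j], st.2.insert (pvGetF forest i j) (i, j))
          else st) st) (([], PySem.Dict.empty) : List Int × PySem.Dict Int (Int × Int)) with hbst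
  obtain ⟨hgood, hkeys⟩ := hbuild
  by_cases hpq : bst.1 = []
  · rw [hkeys, hpq]
    rfl
  · obtain ⟨v0, hv0⟩ := List.exists_mem_of_ne_nil _ hpq
    have hv0k : v0 ∈ bst.2.keys := by
      rw [hkeys]
      exact (PySem.List.mem_dedup _ _).2 hv0
    have hv0g : ∃ p, bst.2.get? v0 = some p := by
      have hcon := (PySem.Dict.contains_iff_mem_keys _ _).2 hv0k
      rcases he : bst.2.get? v0 with _ | p
      · rw [(PySem.Dict.get?_eq_none_iff_contains _ _).1 he] at hcon
        cases hcon
      · exact ⟨p, rfl⟩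
    obtain ⟨p0, hp0⟩ := hv0g
    have hp0in := hgood v0 p0 hp0
    have h00 : pvInB (forest.length : Int) ((PySem.List.pyGetD forest 0 []).length : Int)
        ((0, 0) : Int × Int) := by
      obtain ⟨h1, h2, h3, h4⟩ := hp0in
      exact ⟨le_refl 0, by omega, le_refl 0, by omega⟩
    have hmain := outer_equiv forest (forest.length : Int)
      ((PySem.List.pyGetD forest 0 []).length : Int) bst.2 hr hc hgood
      (PySem.List.sorted bst.1 (fun x => x) false)
      (by simpa using PySem.List.sorted_pairwise bst.1 (fun x => x))
      (fun v hv => by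
        have hvpq : v ∈ bst.1 := (PySem.List.mem_sorted _ _ _ _).1 hv
        have hvk : v ∈ bst.2.keys := by
          rw [hkeys]
          exact (PySem.List.mem_dedup _ _).2 hvpq
        have hcon := (PySem.Dict.contains_iff_mem_keys _ _).2 hvk
        rcases he : bst.2.get? v with _ | p
        · rw [(PySem.Dict.get?_eq_none_iff_contains _ _).1 he] at hcon
          cases hcon
        · exact ⟨p, rfl⟩)
      0 0 0 h00
    rw [hmain, hkeys, sorted_dedup_eq_dcL]
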